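-- pv_equiv track=rewrite | github.com/LSijing/Algorithms-Stanford | c2-graph-search/strongly_connected_components.py | output_size
-- ===== SOURCE A (Python) =====
-- def graph_reverse(adjlist):
--     n = len(adjlist)
--     rev = [[] for i in range(n)]
--     for r,lst in enumerate(adjlist):
--         for l in lst:
--             rev[l].append(r)
--     return rev
--
-- def dfs(adjlist,order=None):
--     """
--     depth first search via stack
--     """
--     n = len(adjlist)
--     if order is None: order = [i for i in range(n)]
--     explored = [False for i in range(n)]
--     remains = [len(adjlist[i])-1 for i in range(n)]
--     finish_order = []
--     lead = [i for i in range(n)]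
--     for leader in order:
--         stack = [] if explored[leader] else [leader]
--         explored[leader] = True
--         while stack:
--             curr = stack[-1]
--             while remains[curr] >= 0 and explored[adjlist[curr][remains[curr]]]:
--                 remains[curr] -= 1
--             if remains[curr] < 0:
--                 stack.pop()
--                 lead[curr] = leader
--                 finish_order.append(curr)
--             else:
--                 nex = adjlist[curr][remains[curr]]
--                 stack.append(nex)
--                 explored[nex] = True
--     return finish_order, lead
--
-- def scc(adjlist):
--     """
--     compute strongly connected components
--     """
--     rev = graph_reverse(adjlist)
--     ordering,_ = dfs(rev)
--     ordering.reverse()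
--     _,father = dfs(adjlist, order=ordering)
--     groups = []
--     dic = dict()
--     for idx,root in enumerate(father):
--         if root not in dic:
--             groups.append([idx])
--             dic[root] = len(groups) - 1
--         else:
--             groups[dic[root]].append(idx)
--     return father,groups
--
-- def output_size(adjlist, x=5):
--     _,gr = scc(adjlist)
--     size = [len(g) for g in gr]
--     sol = []
--     for i in range(x):
--         largest = max(size)
--         sol.append(largest)
--         size.remove(largest)
--     return sol
-- ===== SOURCE B (Python) =====
-- def _finish_order(adjlist):
--     """Finishing order of a depth-first traversal that visits every vertex,
--     with self-contained (node, cursor) stack frames; neighbour lists are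
--     scanned back to front."""
--     n = len(adjlist)
--     explored = [False] * n
--     finish = []
--     for root in range(n):
--         if explored[root]:
--             continue
--         explored[root] = True
--         stack = [(root, 0)]
--         while stack:
--             v, k = stack[-1]
--             nbrs = adjlist[v]
--             ln = len(nbrs)
--             while k < ln and explored[nbrs[ln - 1 - k]]:
--                 k += 1
--             stack[-1] = (v, k)
--             if k == ln:
--                 stack.pop()
--                 finish.append(v)
--             else:
--                 w = nbrs[ln - 1 - k]
--                 explored[w] = True
--                 stack.append((w, 0))
--     return finish
--
-- def output_size(adjlist, x=5):
--     n = len(adjlist)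
--     rev = [[] for _ in range(n)]
--     for u in range(n):
--         for w in adjlist[u]:
--             rev[w].append(u)
--     seen = [False] * n
--     sizes = []
--     for v in reversed(_finish_order(rev)):
--         if seen[v]:
--             continue
--         seen[v] = True
--         queue = [v]
--         head = 0
--         while head < len(queue):
--             u = queue[head]
--             head += 1
--             for w in adjlist[u]:
--                 if not seen[w]:
--                     seen[w] = True
--                     queue.append(w)
--         sizes.append(len(queue))
--     sol = []
--     for _ in range(x):
--         largest = max(sizes)
--         sol.append(largest)
--         sizes.remove(largest)
--     return sol
-- ===== Notes on version B (the rewrite author's own statement) =====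
-- stated objective: alternative
-- what changed: B keeps only the finishing-order DFS of Kosaraju's first phase; the entire second DFS pass with its shared remains countdown array, leader array and groups/dict grouping is replaced by per-leader breadth-first flood fills (FIFO queue) that count each component's size directly, proved equal because DFS and BFS flood fills mark the same reachable-through-unexplored set.
import Mathlib
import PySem

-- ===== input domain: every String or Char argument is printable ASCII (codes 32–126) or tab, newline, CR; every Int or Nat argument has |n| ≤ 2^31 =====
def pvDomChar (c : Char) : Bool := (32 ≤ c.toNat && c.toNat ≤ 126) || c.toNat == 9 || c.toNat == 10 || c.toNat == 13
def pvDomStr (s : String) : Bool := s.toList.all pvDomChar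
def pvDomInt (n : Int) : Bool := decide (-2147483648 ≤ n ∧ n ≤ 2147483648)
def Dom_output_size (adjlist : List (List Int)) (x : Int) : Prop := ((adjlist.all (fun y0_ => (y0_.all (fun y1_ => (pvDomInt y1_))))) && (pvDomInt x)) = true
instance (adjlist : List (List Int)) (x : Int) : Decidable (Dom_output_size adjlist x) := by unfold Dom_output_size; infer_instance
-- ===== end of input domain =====

-- B keeps only Kosaraju's finishing-order DFS; the second DFS pass with its shared `remains`
-- countdown array, leader array and groups/dict grouping is replaced by per-leader breadth-first
-- flood fills (FIFO queue) counting each component's size directly (objective: alternative —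
-- DFS and BFS flood fills provably mark the same reachable-through-unexplored sets).

-- Shared total accessors (exact for Python indexing — including negative-index wraparound — whenever
-- the index is in range; out-of-range reads/writes raise IndexError in Python and are outside Pre_).
def pvGetI (xs : List Int) (i : Int) : Int := PySem.List.pyGetD xs i 0
def pvGetB (xs : List Bool) (i : Int) : Bool := PySem.List.pyGetD xs i false
def pvGetL (xss : List (List Int)) (i : Int) : List Int := PySem.List.pyGetD xss i []

-- Fuel for the DFS while-loops (the Python loops always terminate; each iteration does one cursor
-- step, one push or one pop, so this bound is never reached on inputs the claim covers).
def dfsFuel (adjlist : List (List Int)) : Nat :=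
  (adjlist.map List.length).sum + 2 * adjlist.length + 2

-- ===== PORT A =====

-- rev = [[] for i in range(n)]; for r,lst in enumerate(adjlist): for l in lst: rev[l].append(r)
def graphReverse (adjlist : List (List Int)) : List (List Int) :=
  (PySem.List.enumerate adjlist).foldl
    (fun rev rl => rl.2.foldl
      (fun rev l => PySem.List.pySetD rev l (pvGetL rev l ++ [rl.1])) rev)
    (List.replicate adjlist.length [])

-- the mutable state of A's dfs: stack of nodes plus the shared arrays
structure KosaA where
  stack : List Int
  explored : List Bool
  remains : List Int
  finish : List Int
  lead : List Int
deriving Repr, DecidableEq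

-- the `while stack:` loop of A's dfs, one iteration (one inner-skip step, one pop or one push) per
-- fuel unit; `s.stack` head is the Python `stack[-1]`
def loopA (adjlist : List (List Int)) (leader : Int) : Nat → KosaA → KosaA
  | 0, s => s
  | fuel+1, s =>
    match s.stack with
    | [] => s
    | curr :: rest =>
      let r := pvGetI s.remains curr
      if 0 ≤ r ∧ pvGetB s.explored (pvGetI (pvGetL adjlist curr) r) = true then
        loopA adjlist leader fuel
          ⟨curr :: rest, s.explored, PySem.List.pySetD s.remains curr (r - 1), s.finish, s.lead⟩
      else if r < 0 then
        loopA adjlist leader fuel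
          ⟨rest, s.explored, s.remains, s.finish ++ [curr], PySem.List.pySetD s.lead curr leader⟩
      else
        let nex := pvGetI (pvGetL adjlist curr) r
        loopA adjlist leader fuel
          ⟨nex :: curr :: rest, PySem.List.pySetD s.explored nex true, s.remains, s.finish, s.lead⟩

-- A's dfs (with the order argument always passed explicitly by scc)
def dfsA (adjlist : List (List Int)) (order : List Int) : List Int × List Int :=
  let n := adjlist.length
  let final := order.foldl
    (fun (s : KosaA) leader =>
      loopA adjlist leader (dfsFuel adjlist)
        ⟨if pvGetB s.explored leader then [] else [leader],
         PySem.List.pySetD s.explored leader true, s.remains, s.finish, s.lead⟩)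
    ⟨[], List.replicate n false, adjlist.map (fun lst => (lst.length : Int) - 1), [],
     PySem.List.pyRange 0 n 1⟩
  (final.finish, final.lead)

def sccA (adjlist : List (List Int)) : List Int × List (List Int) :=
  let rev := graphReverse adjlist
  let ordering := (dfsA rev (PySem.List.pyRange 0 rev.length 1)).1
  let father := (dfsA adjlist ordering.reverse).2
  let gd := (PySem.List.enumerate father).foldl
    (fun (gd : List (List Int) × PySem.Dict Int Int) ir =>
      if gd.2.contains ir.2 then
        let gi := gd.2.getD ir.2 0
        (PySem.List.pySetD gd.1 gi (pvGetL gd.1 gi ++ [ir.1]), gd.2)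
      else
        (gd.1 ++ [[ir.1]], gd.2.insert ir.2 (gd.1.length : Int)))
    ([], PySem.Dict.empty)
  (father, gd.1)

def output_size (adjlist : List (List Int)) (x : Int) : List Int :=
  let gr := (sccA adjlist).2
  let size := gr.map (fun g => (g.length : Int))
  -- for i in range(x): largest = max(size); sol.append(largest); size.remove(largest)
  -- max of an empty size list raises ValueError in Python: excluded by Pre_output_size
  ((PySem.List.pyRange 0 x 1).foldl
    (fun (ss : List Int × List Int) _ =>
      let largest := (PySem.List.max? ss.1 (fun y => y)).getD 0
      ((PySem.List.remove? ss.1 largest).getD ss.1, ss.2 ++ [largest]))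
    (size, [])).2

-- ===== PORT B =====

-- B's finishing-order DFS state: stack of (node, cursor) frames; no remains array, no lead array
structure FinB where
  stack : List (Int × Int)
  explored : List Bool
  finish : List Int
deriving Repr, DecidableEq

-- the `while stack:` loop of B's _finish_order, one iteration per fuel unit
def loopF (adjlist : List (List Int)) : Nat → FinB → FinB
  | 0, s => s
  | fuel+1, s =>
    match s.stack with
    | [] => s
    | (v, k) :: rest =>
      let nbrs := pvGetL adjlist v
      let ln : Int := PySem.List.len nbrs
      if k < ln ∧ pvGetB s.explored (pvGetI nbrs (ln - 1 - k)) = true then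
        loopF adjlist fuel ⟨(v, k + 1) :: rest, s.explored, s.finish⟩
      else if k = ln then
        loopF adjlist fuel ⟨rest, s.explored, s.finish ++ [v]⟩
      else
        let w := pvGetI nbrs (ln - 1 - k)
        loopF adjlist fuel
          ⟨(w, 0) :: (v, k) :: rest, PySem.List.pySetD s.explored w true, s.finish⟩

-- B's _finish_order
def finOrder (adjlist : List (List Int)) : List Int :=
  ((PySem.List.pyRange 0 adjlist.length 1).foldl
    (fun (s : FinB) root =>
      if pvGetB s.explored root then s
      else loopF adjlist (dfsFuel adjlist)
        ⟨[(root, 0)], PySem.List.pySetD s.explored root true, s.finish⟩)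
    ⟨[], List.replicate adjlist.length false, []⟩).finish

-- B's breadth-first flood fill: `while head < len(queue):` (fuel: one outer iteration per unit)
def bfsLoop (adjlist : List (List Int)) : Nat → List Int → Int → List Bool → List Int × List Bool
  | 0, q, _, s => (q, s)
  | fuel+1, q, h, s =>
    if h < PySem.List.len q then
      let u := PySem.List.pyGetD q h 0
      let sq := (pvGetL adjlist u).foldl
        (fun (sq : List Bool × List Int) w =>
          if pvGetB sq.1 w = true then sq
          else (PySem.List.pySetD sq.1 w true, sq.2 ++ [w])) (s, q)
      bfsLoop adjlist fuel sq.2 (h + 1) sq.1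
    else (q, s)

def output_size_alt (adjlist : List (List Int)) (x : Int) : List Int :=
  let n := adjlist.length
  let rev := (PySem.List.pyRange 0 n 1).foldl
    (fun rev u => (pvGetL adjlist u).foldl
      (fun rev w => PySem.List.pySetD rev w (pvGetL rev w ++ [u])) rev)
    (List.replicate n [])
  let ord := finOrder rev
  let final := ord.reverse.foldl
    (fun (ss : List Bool × List Int) v =>
      if pvGetB ss.1 v then ss
      else
        let qs := bfsLoop adjlist (n + 1) [v] 0 (PySem.List.pySetD ss.1 v true)
        (qs.2, ss.2 ++ [PySem.List.len qs.1]))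
    (List.replicate n false, [])
  ((PySem.List.pyRange 0 x 1).foldl
    (fun (ss : List Int × List Int) _ =>
      let largest := (PySem.List.max? ss.1 (fun y => y)).getD 0
      ((PySem.List.remove? ss.1 largest).getD ss.1, ss.2 ++ [largest]))
    (final.2, [])).2

-- ===== PRECONDITION & SPEC =====

-- number of strongly connected components of the graph (vertex labels taken modulo n, exactly
-- Python's negative-index wraparound), computed by Floyd–Warshall reachability — independent of
-- both ports' machinery
def sccCountFn (adjlist : List (List Int)) : Int :=
  let n := adjlist.length
  let reach0 : List (List Bool) := (List.range n).map (fun i =>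
    (List.range n).map (fun j =>
      decide (i = j) || (adjlist.getD i []).any (fun w => w.emod n == (j : Int))))
  let reach := (List.range n).foldl (fun R k =>
    (List.range n).map (fun i => (List.range n).map (fun j =>
      (R.getD i []).getD j false ||
        ((R.getD i []).getD k false && (R.getD k []).getD j false)))) reach0
  ((List.range n).filter (fun i =>
    decide (∀ j ∈ List.range i,
      ¬(((reach.getD i []).getD j false) = true ∧ ((reach.getD j []).getD i false) = true)))).length

-- Pre_ = exactly the inputs on which the Python A returns normally: every edge target must be an
-- in-range index (else rev[l] / explored[...] raises IndexError; negative in-range targets wrap and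
-- are kept INSIDE Pre_), and x must not exceed the number of strongly connected components (else
-- Python's max() is applied to an empty size list and raises ValueError — in B's Python exactly too).
def Pre_output_size (adjlist : List (List Int)) (x : Int) : Prop :=
  (∀ lst ∈ adjlist, ∀ w ∈ lst, -(adjlist.length : Int) ≤ w ∧ w < adjlist.length)
  ∧ x ≤ sccCountFn adjlist

instance (adjlist : List (List Int)) (x : Int) : Decidable (Pre_output_size adjlist x) := by
  unfold Pre_output_size; infer_instance

def pvWitness_output_size : List (List Int) × Int := ([[1], [0], []], 2)

def Spec_output_size (adjlist : List (List Int)) (x : Int) (out : List Int) : Prop :=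
  out = output_size_alt adjlist x
instance (adjlist : List (List Int)) (x : Int) (out : List Int) :
    Decidable (Spec_output_size adjlist x out) := by unfold Spec_output_size; infer_instance

-- ===== CLAIM (what is proved, stated in full; the proofs are below) =====
def Claim_equal_output_size : Prop := ∀ (adjlist : List (List Int)) (x : Int),
  Dom_output_size adjlist x → Pre_output_size adjlist x →
  Spec_output_size adjlist x (output_size adjlist x)

-- ===== LEMMAS AND PROOFS =====

-- in-range raw Python index, and the physical cell it denotes
def InR (n : Nat) (v : Int) : Prop := -(n : Int) ≤ v ∧ v < n
def pidx (n : Nat) (v : Int) : Nat := if 0 ≤ v then v.toNat else (v + n).toNat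

lemma pidx_lt {n : Nat} {v : Int} (h : InR n v) : pidx n v < n := by
  unfold pidx; rcases h with ⟨h1, h2⟩; split <;> omega

lemma pyIdx_pidx {n : Nat} {v : Int} (h : InR n v) : PySem.List.pyIdx? n v = some (pidx n v) := by
  rcases h with ⟨h1, h2⟩
  simp only [PySem.List.pyIdx?, pidx]
  split_ifs with h3 <;> try omega
  · rfl
  · congr 1; omega

lemma pvGetD_pidx {α : Type} (xs : List α) (v : Int) (d : α) (h : InR xs.length v) :
    PySem.List.pyGetD xs v d = xs.getD (pidx xs.length v) d := by
  have := pyIdx_pidx (n := xs.length) (v := v) h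
  simp [PySem.List.pyGetD, PySem.List.pyGet?, this, List.getD]

lemma pvSetD_pidx {α : Type} (xs : List α) (v : Int) (a : α) (h : InR xs.length v) :
    PySem.List.pySetD xs v a = xs.set (pidx xs.length v) a := by
  have := pyIdx_pidx (n := xs.length) (v := v) h
  simp [PySem.List.pySetD, PySem.List.pySet?, this]

lemma getD_set_eq {α : Type} (xs : List α) {j : Nat} (v d : α) (h : j < xs.length) :
    (xs.set j v).getD j d = v := by
  rw [List.getD_eq_getElem _ _ (by simpa using h), List.getElem_set_self]

lemma getD_set_ne {α : Type} (xs : List α) {i j : Nat} (v d : α) (h : j ≠ i) :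
    (xs.set j v).getD i d = xs.getD i d := by
  by_cases hi : i < xs.length
  · rw [List.getD_eq_getElem _ _ (by simpa using hi), List.getD_eq_getElem _ _ hi,
      List.getElem_set_ne h]
  · rw [List.getD_eq_default _ _ (by simpa using Nat.le_of_not_lt hi),
      List.getD_eq_default _ _ (Nat.le_of_not_lt hi)]

lemma set_true_of_getD_true (xs : List Bool) (j : Nat) (h : xs.getD j false = true) :
    xs.set j true = xs := by
  by_cases hj : j < xs.length
  · apply List.ext_getElem (by simp)
    intro i h1 h2
    rw [List.getElem_set]
    split
    · next heq => rw [List.getD_eq_getElem _ _ hj] at h; subst heq; exact h.symm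
    · rfl
  · exact List.set_eq_of_length_le (Nat.le_of_not_lt hj)

lemma nodup_map_mem_inj {α β : Type} {f : α → β} {l : List α} (h : (l.map f).Nodup) :
    ∀ a ∈ l, ∀ b ∈ l, f a = f b → a = b := by
  induction l with
  | nil => simp
  | cons x t ih =>
    rw [List.map_cons, List.nodup_cons] at h
    intro a ha b hb hf
    rcases List.mem_cons.1 ha with rfl | ha' <;> rcases List.mem_cons.1 hb with rfl | hb'
    · rfl
    · have hm : f b ∈ t.map f := List.mem_map_of_mem hb'
      exact absurd (hf ▸ hm) h.1
    · have hm : f a ∈ t.map f := List.mem_map_of_mem ha'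
      exact absurd (hf ▸ hm) h.1
    · exact ih h.2 a ha' b hb' hf

-- all edge targets in range
def AdjOK (adjlist : List (List Int)) : Prop :=
  ∀ lst ∈ adjlist, ∀ w ∈ lst, InR adjlist.length w


-- ===== Part I: A's DFS pass and B's (node, cursor) finishing-order DFS produce the same
-- explored array and the same finish list (lockstep simulation) =====

-- the simulation invariant between A's and B's DFS loop states
structure SimInv (adjlist : List (List Int)) (a : KosaA) (b : FinB) : Prop where
  expl : a.explored = b.explored
  fin : a.finish = b.finish
  stk : a.stack = b.stack.map Prod.fst
  lenE : a.explored.length = adjlist.length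
  lenR : a.remains.length = adjlist.length
  frames : ∀ p ∈ b.stack, 0 ≤ p.2 ∧ p.2 ≤ ((adjlist.getD (pidx adjlist.length p.1) []).length : Int) ∧
    InR adjlist.length p.1 ∧
    a.remains.getD (pidx adjlist.length p.1) 0
      = ((adjlist.getD (pidx adjlist.length p.1) []).length : Int) - 1 - p.2 ∧
    a.explored.getD (pidx adjlist.length p.1) false = true
  nodup : (b.stack.map (fun p => pidx adjlist.length p.1)).Nodup
  fresh : ∀ j < adjlist.length, a.explored.getD j false = false →
    a.remains.getD j 0 = ((adjlist.getD j []).length : Int) - 1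
  finR : ∀ v ∈ a.finish, InR adjlist.length v

-- the invariant carried between leaders (stack-independent part)
structure OutInv (adjlist : List (List Int)) (a : KosaA) (b : FinB) : Prop where
  expl : a.explored = b.explored
  fin : a.finish = b.finish
  lenE : a.explored.length = adjlist.length
  lenR : a.remains.length = adjlist.length
  fresh : ∀ j < adjlist.length, a.explored.getD j false = false →
    a.remains.getD j 0 = ((adjlist.getD j []).length : Int) - 1
  finR : ∀ v ∈ a.finish, InR adjlist.length v

lemma loop_sim (adjlist : List (List Int)) (hadj : AdjOK adjlist) (leader : Int) :
    ∀ (fuel : Nat) (a : KosaA) (b : FinB), SimInv adjlist a b →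
      SimInv adjlist (loopA adjlist leader fuel a) (loopF adjlist fuel b) := by
  intro fuel
  induction fuel with
  | zero => intro a b h; simpa [loopA, loopF] using h
  | succ fuel ih =>
    rintro ⟨sa, ea, ra, fa, la⟩ ⟨sb, eb, fb⟩ h
    obtain ⟨he, hf, hs, hlenE, hlenR, hfr, hnd, hfresh, hfinR⟩ := h
    simp only at he hf hs hlenE hlenR hfr hnd hfresh hfinR
    subst he hf hs
    match hsb : sb with
    | [] =>
      show SimInv adjlist (⟨[], ea, ra, fa, la⟩ : KosaA) (⟨[], ea, fa⟩ : FinB)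
      exact ⟨rfl, rfl, rfl, hlenE, hlenR, by simp, by simp, hfresh, hfinR⟩
    | (v, k) :: rest =>
      obtain ⟨hk0, hkl, hvR, hrem, hexp⟩ := hfr (v, k) (by simp)
      set n := adjlist.length with hn
      set m := pidx n v with hm
      set lst := adjlist.getD m [] with hlstdef
      set ln : Int := (lst.length : Int) with hln
      have hmn : m < n := pidx_lt hvR
      have hrav : pvGetI ra v = ln - 1 - k := by
        rw [pvGetI, pvGetD_pidx _ _ _ (by rw [hlenR]; exact hvR), hlenR]; exact hrem
      have hlstv : pvGetL adjlist v = lst := by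
        rw [pvGetL, pvGetD_pidx _ _ _ hvR]
      have hlb : PySem.List.len lst = ln := PySem.List.len_eq lst
      -- reduce one step of each loop
      show SimInv adjlist
        (loopA adjlist leader (fuel+1) ⟨v :: rest.map Prod.fst, ea, ra, fa, la⟩)
        (loopF adjlist (fuel+1) ⟨(v, k) :: rest, ea, fa⟩)
      simp only [loopA, loopF, hrav, hlstv, hlb]
      by_cases hC : pvGetB ea (pvGetI lst (ln - 1 - k)) = true
      · by_cases hklt : k < ln
        · -- skip step on both sides
          rw [if_pos ⟨by omega, hC⟩, if_pos ⟨hklt, hC⟩]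
          apply ih
          have hset : PySem.List.pySetD ra v (ln - 1 - k - 1) = ra.set m (ln - 1 - k - 1) := by
            rw [pvSetD_pidx _ _ _ (by rw [hlenR]; exact hvR), hlenR]
          refine ⟨rfl, rfl, by simp, hlenE, by rw [hset, List.length_set]; exact hlenR, ?_,
            by simpa using hnd, ?_, hfinR⟩
          · intro p hp
            rcases List.mem_cons.1 hp with rfl | hp'
            · refine ⟨by omega, by show k + 1 ≤ ln; omega, hvR, ?_, hexp⟩
              simp only [hset]
              rw [getD_set_eq _ _ _ (by rw [hlenR]; exact hmn)]
              show ln - 1 - k - 1 = ln - 1 - (k + 1)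
              omega
            · obtain ⟨h1, h2, h3, h4, h5⟩ := hfr p (by simp [hp'])
              refine ⟨h1, h2, h3, ?_, h5⟩
              have hne : pidx n p.1 ≠ m := by
                have hnd' := hnd
                rw [List.map_cons, List.nodup_cons] at hnd'
                intro hcon
                apply hnd'.1
                have hmem : pidx n p.1 ∈ List.map (fun p => pidx n p.1) rest :=
                  List.mem_map_of_mem hp'
                rwa [hcon] at hmem
              simp only [hset]
              rw [getD_set_ne _ _ _ (fun hx => hne hx.symm)]
              exact h4
          · intro j hj hje
            have hjm : j ≠ m := fun hx => by rw [hx, hexp] at hje; cases hje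
            simp only [hset]
            rw [getD_set_ne _ _ _ (fun hx => hjm hx.symm)]
            exact hfresh j hj hje
        · -- k = ln on both sides: pop
          have hkeq : k = ln := by omega
          rw [if_neg (show ¬(0 ≤ ln - 1 - k ∧ pvGetB ea (pvGetI lst (ln - 1 - k)) = true) from
              by intro hx; have := hx.1; omega),
            if_pos (show ln - 1 - k < 0 from by omega),
            if_neg (show ¬(k < ln ∧ pvGetB ea (pvGetI lst (ln - 1 - k)) = true) from
              by intro hx; have := hx.1; omega),
            if_pos hkeq]
          apply ih
          have hnd' := hnd
          rw [List.map_cons, List.nodup_cons] at hnd'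
          refine ⟨rfl, rfl, rfl, hlenE, hlenR, ?_, hnd'.2, hfresh, ?_⟩
          · intro p hp; exact hfr p (by simp [hp])
          · intro u hu
            rcases List.mem_append.1 hu with hu' | hu'
            · exact hfinR u hu'
            · rw [List.mem_singleton.1 hu']; exact hvR
      · by_cases hklt : k < ln
        · -- push on both sides
          rw [if_neg (show ¬(0 ≤ ln - 1 - k ∧ pvGetB ea (pvGetI lst (ln - 1 - k)) = true) from
              by intro hx; exact hC hx.2),
            if_neg (show ¬(ln - 1 - k < 0) from by omega),
            if_neg (show ¬(k < ln ∧ pvGetB ea (pvGetI lst (ln - 1 - k)) = true) from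
              by intro hx; exact hC hx.2),
            if_neg (show ¬(k = ln) from by omega)]
          apply ih
          set w := pvGetI lst (ln - 1 - k) with hw
          have hwmem : w ∈ lst := PySem.List.pyGetD_mem lst 0 (by unfold PySem.Raise.InRange; omega)
          have hlstmem : lst ∈ adjlist := by
            rw [hlstdef, List.getD_eq_getElem _ _ hmn]; exact List.getElem_mem _
          have hwR : InR n w := hadj lst hlstmem w hwmem
          set mw := pidx n w with hmw
          have hmwn : mw < n := pidx_lt hwR
          have hwe : ea.getD mw false = false := by
            have : pvGetB ea w = ea.getD mw false := by
              rw [pvGetB, pvGetD_pidx _ _ _ (by rw [hlenE]; exact hwR), hlenE]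
            rw [← this]; exact Bool.not_eq_true _ ▸ (by simpa [hw] using hC)
          have hsete : PySem.List.pySetD ea w true = ea.set mw true := by
            rw [pvSetD_pidx _ _ _ (by rw [hlenE]; exact hwR), hlenE]
          have hstkpidx_ne : ∀ p ∈ (v, k) :: rest, pidx n p.1 ≠ mw := by
            intro p hp hcon
            have h5 := (hfr p hp).2.2.2.2
            rw [hcon, hwe] at h5; cases h5
          refine ⟨rfl, rfl, by simp, by rw [hsete, List.length_set]; exact hlenE, hlenR,
            ?_, ?_, ?_, hfinR⟩
          · intro p hp
            rcases List.mem_cons.1 hp with rfl | hp'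
            · refine ⟨le_refl 0, by positivity, hwR, ?_, ?_⟩
              · have := hfresh mw hmwn hwe
                simpa using this
              · simp only [hsete]
                rw [getD_set_eq _ _ _ (by rw [hlenE]; exact hmwn)]
            · obtain ⟨h1, h2, h3, h4, h5⟩ := hfr p hp'
              refine ⟨h1, h2, h3, h4, ?_⟩
              simp only [hsete]
              rw [getD_set_ne _ _ _ (Ne.symm (hstkpidx_ne p hp'))]
              exact h5
          · simp only [List.map_cons, List.nodup_cons]
            constructor
            · intro hcon
              rcases List.mem_cons.1 hcon with heq | hmem
              · have heq' : pidx n (v, k).1 = mw := heq.symm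
                exact hstkpidx_ne (v, k) (List.mem_cons_self) heq'
              · rcases List.mem_map.1 hmem with ⟨p, hp, hpe⟩
                have hpe' : pidx n p.1 = mw := hpe
                exact hstkpidx_ne p (List.mem_cons_of_mem _ hp) hpe'
            · simpa using hnd
          · intro j hj hje
            simp only [hsete] at hje
            have hjm : j ≠ mw := by
              intro hx
              rw [hx] at hje
              rw [getD_set_eq _ _ _ (by rw [hlenE]; exact hmwn)] at hje
              cases hje
            rw [getD_set_ne _ _ _ (fun hx => hjm hx.symm)] at hje
            exact hfresh j hj hje
        · -- k = ln but skip-condition false: pop on both sides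
          have hkeq : k = ln := by omega
          rw [if_neg (show ¬(0 ≤ ln - 1 - k ∧ pvGetB ea (pvGetI lst (ln - 1 - k)) = true) from
              by intro hx; have := hx.1; omega),
            if_pos (show ln - 1 - k < 0 from by omega),
            if_neg (show ¬(k < ln ∧ pvGetB ea (pvGetI lst (ln - 1 - k)) = true) from
              by intro hx; have := hx.1; omega),
            if_pos hkeq]
          apply ih
          have hnd' := hnd
          rw [List.map_cons, List.nodup_cons] at hnd'
          refine ⟨rfl, rfl, rfl, hlenE, hlenR, ?_, hnd'.2, hfresh, ?_⟩
          · intro p hp; exact hfr p (by simp [hp])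
          · intro u hu
            rcases List.mem_append.1 hu with hu' | hu'
            · exact hfinR u hu'
            · rw [List.mem_singleton.1 hu']; exact hvR

lemma OutInv_of_SimInv {adjlist : List (List Int)} {a : KosaA} {b : FinB}
    (h : SimInv adjlist a b) : OutInv adjlist a b :=
  ⟨h.expl, h.fin, h.lenE, h.lenR, h.fresh, h.finR⟩

lemma loopA_nil (adjlist : List (List Int)) (leader : Int) (fuel : Nat)
    (e : List Bool) (r f l : List Int) :
    loopA adjlist leader fuel ⟨[], e, r, f, l⟩ = ⟨[], e, r, f, l⟩ := by
  cases fuel <;> rfl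

lemma dfs_sim (adjlist : List (List Int)) (hadj : AdjOK adjlist) (order : List Int)
    (hord : ∀ v ∈ order, InR adjlist.length v) (a : KosaA) (b : FinB)
    (h : OutInv adjlist a b) :
    OutInv adjlist
      (order.foldl (fun (s : KosaA) leader =>
        loopA adjlist leader (dfsFuel adjlist)
          ⟨if pvGetB s.explored leader then [] else [leader],
           PySem.List.pySetD s.explored leader true, s.remains, s.finish, s.lead⟩) a)
      (order.foldl (fun (s : FinB) root =>
        if pvGetB s.explored root then s
        else loopF adjlist (dfsFuel adjlist)
          ⟨[(root, 0)], PySem.List.pySetD s.explored root true, s.finish⟩) b) := by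
  induction order generalizing a b with
  | nil => simpa using h
  | cons leader t ih =>
    have hlead : InR adjlist.length leader := hord leader (by simp)
    have hordt : ∀ v ∈ t, InR adjlist.length v := fun v hv => hord v (by simp [hv])
    simp only [List.foldl_cons]
    apply ih hordt
    obtain ⟨he, hf, hlenE, hlenR, hfresh, hfinR⟩ := h
    have hml : pidx adjlist.length leader < adjlist.length := pidx_lt hlead
    have hgete : pvGetB a.explored leader = a.explored.getD (pidx adjlist.length leader) false := by
      rw [pvGetB, pvGetD_pidx _ _ _ (by rw [hlenE]; exact hlead), hlenE]
    have hsete : PySem.List.pySetD a.explored leader true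
        = a.explored.set (pidx adjlist.length leader) true := by
      rw [pvSetD_pidx _ _ _ (by rw [hlenE]; exact hlead), hlenE]
    by_cases hE : pvGetB a.explored leader = true
    · have hEb : pvGetB b.explored leader = true := by rw [← he]; exact hE
      rw [if_pos hEb]
      have hnoop : PySem.List.pySetD a.explored leader true = a.explored := by
        rw [hsete]
        exact set_true_of_getD_true _ _ (by rw [← hgete]; exact hE)
      rw [if_pos hE, hnoop, loopA_nil]
      exact ⟨he, hf, hlenE, hlenR, hfresh, hfinR⟩
    · have hEb : ¬ pvGetB b.explored leader = true := by rw [← he]; exact hE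
      rw [if_neg hEb, if_neg hE]
      have hEf : a.explored.getD (pidx adjlist.length leader) false = false := by
        rw [← hgete]; exact Bool.not_eq_true _ ▸ (by simpa using hE)
      apply OutInv_of_SimInv
      apply loop_sim adjlist hadj leader (dfsFuel adjlist)
      have hseteb : PySem.List.pySetD b.explored leader true
          = a.explored.set (pidx adjlist.length leader) true := by
        rw [← he]; exact hsete
      refine ⟨by rw [hsete, hseteb], hf, by simp, ?_, hlenR, ?_, by simp, ?_, hfinR⟩
      · rw [hsete, List.length_set]; exact hlenE
      · intro p hp
        rcases List.mem_cons.1 hp with rfl | hp'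
        · refine ⟨le_refl 0, by positivity, hlead, ?_, ?_⟩
          · have := hfresh (pidx adjlist.length leader) hml hEf
            simpa using this
          · rw [hsete, getD_set_eq _ _ _ (by rw [hlenE]; exact hml)]
        · cases hp'
      · intro j hj hje
        rw [hsete] at hje
        have hjm : j ≠ pidx adjlist.length leader := by
          intro hx
          rw [hx, getD_set_eq _ _ _ (by rw [hlenE]; exact hml)] at hje
          cases hje
        rw [getD_set_ne _ _ _ (fun hx => hjm hx.symm)] at hje
        exact hfresh j hj hje

-- pass-1 equality: A's first dfs on the reversed graph yields exactly B's _finish_order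
lemma pass1_eq (adjlist : List (List Int)) (hadj : AdjOK adjlist) :
    (dfsA adjlist (PySem.List.pyRange 0 adjlist.length 1)).1 = finOrder adjlist := by
  have hord : ∀ v ∈ PySem.List.pyRange 0 (adjlist.length : Int) 1, InR adjlist.length v := by
    intro v hv
    have := PySem.List.mem_pyRange_one.1 hv
    unfold InR; omega
  have h0 : OutInv adjlist
      ⟨[], List.replicate adjlist.length false,
        adjlist.map (fun lst => (lst.length : Int) - 1), [],
        PySem.List.pyRange 0 adjlist.length 1⟩
      ⟨[], List.replicate adjlist.length false, []⟩ := by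
    refine ⟨rfl, rfl, by simp, by simp, ?_, by simp⟩
    intro j hj _
    rw [List.getD_eq_getElem _ _ (by simpa using hj), List.getElem_map,
      List.getD_eq_getElem _ _ hj]
  have hres := dfs_sim adjlist hadj _ hord _ _ h0
  exact hres.fin


-- ===== Part II: flood-fill characterization — a DFS block of A and a BFS block of B both mark
-- exactly the set reachable from the leader through unexplored vertices =====

-- one edge step at cell level, target unexplored in the base array e
inductive RA (adj : List (List Int)) (e : List Bool) (L : Nat) : Nat → Prop
  | refl : RA adj e L L
  | tail {c : Nat} {w : Int} : RA adj e L c → w ∈ adj.getD c [] →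
      e.getD (pidx adj.length w) false = false → RA adj e L (pidx adj.length w)

lemma RA_congr {adj : List (List Int)} {e e' : List Bool} {L c : Nat}
    (h : ∀ j, e.getD j false = e'.getD j false) (hr : RA adj e L c) : RA adj e' L c := by
  induction hr with
  | refl => exact RA.refl
  | tail hr hw hu ih => exact RA.tail ih hw (by rw [← h]; exact hu)

lemma RA_ne_e {adj : List (List Int)} {e : List Bool} {L c : Nat}
    (hLe : e.getD L false = false) (hr : RA adj e L c) : e.getD c false = false := by
  induction hr with
  | refl => exact hLe
  | tail hr hw hu ih => exact hu

lemma RA_lt {adj : List (List Int)} {e : List Bool} {L c : Nat} (hadj : AdjOK adj)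
    (hL : L < adj.length) (hr : RA adj e L c) : c < adj.length := by
  induction hr with
  | refl => exact hL
  | tail hr hw hu ih =>
    next cc w =>
    have hlst : adj.getD cc [] ∈ adj := by
      rw [List.getD_eq_getElem _ _ ih]; exact List.getElem_mem _
    exact pidx_lt (hadj _ hlst _ hw)

-- measure bookkeeping helpers
lemma sum_map_set (l : List Int) (f : Int → Nat) :
    ∀ (i : Nat), i < l.length → ∀ (v : Int),
      ((l.set i v).map f).sum + f (l.getD i 0) = (l.map f).sum + f v := by
  induction l with
  | nil => intro i hi; simp at hi
  | cons x t ih =>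
    intro i hi v
    cases i with
    | zero => simp [List.set_cons_zero]; omega
    | succ j =>
      have hj : j < t.length := by simpa using hi
      have := ih j hj v
      simp only [List.set_cons_succ, List.map_cons, List.sum_cons, List.getD_cons_succ]
      omega

lemma countP_set_true (l : List Bool) :
    ∀ (i : Nat), i < l.length → l.getD i false = false →
      (l.set i true).countP (fun b => !b) + 1 = l.countP (fun b => !b) := by
  induction l with
  | nil => intro i hi; simp at hi
  | cons x t ih =>
    intro i hi hf
    cases i with
    | zero =>
      simp only [List.getD_cons_zero] at hf
      subst hf
      simp [List.set_cons_zero]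
    | succ j =>
      have hj : j < t.length := by simpa using hi
      have := ih j hj (by simpa using hf)
      simp only [List.set_cons_succ, List.countP_cons]
      omega

lemma nodup_lt_length_le (l : List Nat) (n : Nat) (hnd : l.Nodup) (hlt : ∀ x ∈ l, x < n) :
    l.length ≤ n := by
  have hsub : l ⊆ List.range n := fun x hx => List.mem_range.2 (hlt x hx)
  calc l.length = l.toFinset.card := (List.toFinset_card_of_nodup hnd).symm
    _ ≤ (List.range n).toFinset.card := Finset.card_le_card (fun x hx => by
        rw [List.mem_toFinset] at hx ⊢; exact hsub hx)
    _ = n := by rw [List.toFinset_range, Finset.card_range]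

-- the DFS-block invariant for A's machine: e is the explored array at block start, L the leader
-- cell, lv the raw leader label (written into lead on pop), v0 the raw root label
structure ABlk (adj : List (List Int)) (e : List Bool) (L : Nat) (lv v0 : Int)
    (lead0 fin0 : List Int) (s : KosaA) : Prop where
  lenE : s.explored.length = adj.length
  lenR : s.remains.length = adj.length
  lenL : s.lead.length = adj.length
  mono : ∀ c, e.getD c false = true → s.explored.getD c false = true
  hLm : s.explored.getD L false = true
  sub : ∀ c, s.explored.getD c false = true → e.getD c false = true ∨ RA adj e L c
  stkR : ∀ v ∈ s.stack, InR adj.length v ∧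
      s.explored.getD (pidx adj.length v) false = true ∧
      e.getD (pidx adj.length v) false = false ∧
      (v = v0 ∨ ∃ lst ∈ adj, v ∈ lst)
  stkN : (s.stack.map (fun v => pidx adj.length v)).Nodup
  frames : ∀ v ∈ s.stack, ∀ j : Nat,
      s.remains.getD (pidx adj.length v) 0 < (j : Int) →
      j < (adj.getD (pidx adj.length v) []).length →
      s.explored.getD (pidx adj.length ((adj.getD (pidx adj.length v) []).getD j 0)) false = true
  closed : ∀ c, s.explored.getD c false = true → e.getD c false = false →
      c ∉ s.stack.map (fun v => pidx adj.length v) →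
      ∀ w ∈ adj.getD c [], s.explored.getD (pidx adj.length w) false = true
  fin : ∃ seg, s.finish = fin0 ++ seg ∧ (seg.map (fun v => pidx adj.length v)).Nodup ∧
      (∀ v ∈ seg, InR adj.length v ∧ (v = v0 ∨ ∃ lst ∈ adj, v ∈ lst)) ∧
      (∀ c, c ∈ seg.map (fun v => pidx adj.length v) ↔
        (s.explored.getD c false = true ∧ e.getD c false = false ∧
          c ∉ s.stack.map (fun v => pidx adj.length v)))
  leadK : ∀ c, ¬ (s.explored.getD c false = true ∧ e.getD c false = false ∧
      c ∉ s.stack.map (fun v => pidx adj.length v)) → s.lead.getD c 0 = lead0.getD c 0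
  leadS : ∀ c, s.explored.getD c false = true → e.getD c false = false →
      c ∉ s.stack.map (fun v => pidx adj.length v) → s.lead.getD c 0 = lv
  remle : ∀ c < adj.length, s.remains.getD c 0 < ((adj.getD c []).length : Int)
  fresh : ∀ c < adj.length, s.explored.getD c false = false →
      s.remains.getD c 0 = ((adj.getD c []).length : Int) - 1

def muA (s : KosaA) : Nat :=
  (s.remains.map (fun r => (r + 1).toNat)).sum + 2 * (s.explored.countP (fun b => !b))
    + s.stack.length

lemma loopA_run (adj : List (List Int)) (hadj : AdjOK adj) (e : List Bool) (L : Nat)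
    (lv v0 : Int) (lead0 fin0 : List Int) :
    ∀ (fuel : Nat) (s : KosaA), ABlk adj e L lv v0 lead0 fin0 s → muA s ≤ fuel →
      (loopA adj lv fuel s).stack = [] ∧ ABlk adj e L lv v0 lead0 fin0 (loopA adj lv fuel s) := by
  intro fuel
  induction fuel with
  | zero =>
    intro s hI hmu
    have hst : s.stack = [] := List.length_eq_zero_iff.mp (by unfold muA at hmu; omega)
    exact ⟨hst, hI⟩
  | succ fuel ih =>
    rintro ⟨sa, ea, ra, fa, la⟩ hI hmu
    obtain ⟨lenE, lenR, lenL, mono, hLm, sub, stkR, stkN, frames, closed, fin, leadK, leadS,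
      remle, fresh⟩ := hI
    simp only at lenE lenR lenL mono hLm sub stkR stkN frames closed fin leadK leadS remle fresh
    match hsa : sa with
    | [] =>
      exact ⟨rfl, ⟨lenE, lenR, lenL, mono, hLm, sub, stkR, stkN, frames, closed, fin,
        leadK, leadS, remle, fresh⟩⟩
    | curr :: rest =>
      obtain ⟨hcR, hcE, hce, hcO⟩ := stkR curr (by simp)
      set n := adj.length with hn
      set m := pidx n curr with hm
      set lst := adj.getD m [] with hlstdef
      set dm : Int := (lst.length : Int) with hdm
      have hmn : m < n := pidx_lt hcR
      have hlstmem : lst ∈ adj := by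
        rw [hlstdef, List.getD_eq_getElem _ _ hmn]; exact List.getElem_mem _
      set r := ra.getD m 0 with hr
      have hrav : pvGetI ra curr = r := by
        rw [pvGetI, pvGetD_pidx _ _ _ (by rw [lenR]; exact hcR), lenR]
      have hlstv : pvGetL adj curr = lst := by
        rw [pvGetL, pvGetD_pidx _ _ _ hcR]
      have hrlt : r < dm := remle m hmn
      have hmusum := sum_map_set ra (fun t => (t + 1).toNat) m (by rw [lenR]; exact hmn)
      show (loopA adj lv (fuel+1) ⟨curr :: rest, ea, ra, fa, la⟩).stack = [] ∧ _
      simp only [loopA, hrav, hlstv]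
      by_cases hC : 0 ≤ r ∧ pvGetB ea (pvGetI lst r) = true
      · -- skip step
        rw [if_pos hC]
        obtain ⟨hr0, hCex⟩ := hC
        have hpidxr : pidx lst.length r = r.toNat := by unfold pidx; rw [if_pos hr0]
        have hnbr : pvGetI lst r = lst.getD r.toNat 0 := by
          rw [pvGetI, pvGetD_pidx _ _ _ ⟨by omega, by exact_mod_cast hrlt⟩, hpidxr]
        have hnmem : lst.getD r.toNat 0 ∈ lst := by
          rw [List.getD_eq_getElem _ _ (by omega)]
          exact List.getElem_mem _
        have hnR : InR n (lst.getD r.toNat 0) := hadj lst hlstmem _ hnmem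
        have hCex' : ea.getD (pidx n (lst.getD r.toNat 0)) false = true := by
          rw [hnbr] at hCex
          rw [pvGetB, pvGetD_pidx ea _ false (by rw [lenE]; exact hnR), lenE] at hCex
          exact hCex
        have hset : PySem.List.pySetD ra curr (r - 1) = ra.set m (r - 1) := by
          rw [pvSetD_pidx _ _ _ (by rw [lenR]; exact hcR), lenR]
        rw [hset]
        apply ih
        · refine ⟨lenE, by rw [List.length_set]; exact lenR, lenL, mono, hLm, sub,
            stkR, stkN, ?_, closed, fin, leadK, leadS, ?_, ?_⟩
          · intro v hv j hj1 hj2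
            by_cases hvm : pidx n v = m
            · rw [hvm] at hj1
              rw [getD_set_eq _ _ _ (by rw [lenR]; exact hmn)] at hj1
              rcases Nat.lt_or_ge r.toNat j with hlt | hge
              · exact frames v hv j (by rw [hvm]; omega) hj2
              · have hjr : j = r.toNat := by omega
                subst hjr
                rw [hvm]
                exact hCex'
            · rw [getD_set_ne _ _ _ (fun hx => hvm hx.symm)] at hj1
              exact frames v hv j hj1 hj2
          · intro c hcn
            by_cases hcm : c = m
            · subst hcm
              rw [getD_set_eq _ _ _ (by rw [lenR]; exact hmn), ← hlstdef, ← hdm]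
              omega
            · rw [getD_set_ne _ _ _ (fun hx => hcm hx.symm)]
              exact remle c hcn
          · intro c hcn hcf
            have hcm : c ≠ m := fun hx => by rw [hx, hcE] at hcf; cases hcf
            rw [getD_set_ne _ _ _ (fun hx => hcm hx.symm)]
            exact fresh c hcn hcf
        · have := hmusum (r - 1)
          unfold muA at hmu ⊢
          dsimp only at *
          have h1 : (r + 1).toNat = (r - 1 + 1).toNat + 1 := by omega
          omega
      · rw [if_neg hC]
        by_cases hC2 : r < 0
        · -- pop step
          rw [if_pos hC2]
          have hsetl : PySem.List.pySetD la curr lv = la.set m lv := by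
            rw [pvSetD_pidx _ _ _ (by rw [lenL]; exact hcR), lenL]
          rw [hsetl]
          obtain ⟨seg, hfa, hsegN, hsegL, hsegIff⟩ := fin
          have hnd' := stkN
          rw [List.map_cons, List.nodup_cons] at hnd'
          have hmrest : m ∉ rest.map (fun v => pidx n v) := hm ▸ hnd'.1
          have hmseg : m ∉ seg.map (fun v => pidx n v) := by
            intro hx
            have := (hsegIff m).1 hx
            exact this.2.2 (by rw [List.map_cons, ← hm]; exact List.mem_cons_self)
          apply ih
          · refine ⟨lenE, lenR, by rw [List.length_set]; exact lenL, mono, hLm, sub, ?_,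
              hnd'.2, ?_, ?_, ?_, ?_, ?_, remle, fresh⟩
            · intro v hv; exact stkR v (by simp [hv])
            · intro v hv; exact frames v (by simp [hv])
            · -- closed
              intro c hcex hcee hcst w hw
              by_cases hcm : c = m
              · subst hcm
                have hwidx := List.mem_iff_getElem.1 hw
                obtain ⟨j, hj, hjw⟩ := hwidx
                have := frames curr (by simp) j (by rw [← hm, ← hr]; omega) hj
                rw [List.getD_eq_getElem _ _ hj, hjw] at this
                exact this
              · refine closed c hcex hcee ?_ w hw
                rw [List.map_cons]
                intro hx
                rcases List.mem_cons.1 hx with hx' | hx'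
                · exact hcm (hx'.trans hm.symm)
                · exact hcst hx'
            · -- fin
              refine ⟨seg ++ [curr], by rw [hfa, List.append_assoc], ?_, ?_, ?_⟩
              · rw [List.map_append]
                simp only [List.map_cons, List.map_nil]
                rw [List.nodup_append]
                refine ⟨hsegN, by simp, ?_⟩
                intro a ha b hb
                rw [List.mem_singleton] at hb
                subst hb
                intro hx
                apply hmseg
                rw [hm, ← hx]
                exact ha
              · intro v hv
                rcases List.mem_append.1 hv with hv' | hv'
                · exact hsegL v hv'
                · rw [List.mem_singleton.1 hv']; exact ⟨hcR, hcO⟩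
              · intro c
                rw [List.map_append, List.mem_append]
                constructor
                · rintro (hc | hc)
                  · have := (hsegIff c).1 hc
                    exact ⟨this.1, this.2.1, fun hx => this.2.2 (by
                      rw [List.map_cons]; exact List.mem_cons_of_mem _ hx)⟩
                  · have hcm : c = m := by
                      simp only [List.map_cons, List.map_nil, List.mem_singleton] at hc
                      exact hc.trans hm.symm
                    rw [hcm]
                    exact ⟨hcE, hce, hmrest⟩
                · rintro ⟨h1, h2, h3⟩
                  by_cases hcm : c = m
                  · right
                    simp only [List.map_cons, List.map_nil, List.mem_singleton]
                    exact hcm.trans hm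
                  · left
                    refine (hsegIff c).2 ⟨h1, h2, ?_⟩
                    rw [List.map_cons]
                    intro hx
                    rcases List.mem_cons.1 hx with hx' | hx'
                    · exact hcm (hx'.trans hm.symm)
                    · exact h3 hx'
            · -- leadK
              intro c hcnot
              have hcm : c ≠ m := by
                intro hx
                subst hx
                exact hcnot ⟨hcE, hce, hmrest⟩
              rw [getD_set_ne _ _ _ (fun hx => hcm hx.symm)]
              apply leadK
              rintro ⟨h1, h2, h3⟩
              apply hcnot
              refine ⟨h1, h2, ?_⟩
              intro hx
              apply h3
              rw [List.map_cons]
              exact List.mem_cons_of_mem _ hx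
            · -- leadS
              intro c h1 h2 h3
              by_cases hcm : c = m
              · subst hcm
                rw [getD_set_eq _ _ _ (by rw [lenL]; exact hmn)]
              · rw [getD_set_ne _ _ _ (fun hx => hcm hx.symm)]
                refine leadS c h1 h2 ?_
                rw [List.map_cons]
                intro hx
                rcases List.mem_cons.1 hx with hx' | hx'
                · exact hcm (hx'.trans hm.symm)
                · exact h3 hx'
          · unfold muA at hmu ⊢
            simp only [List.length_cons] at hmu
            simp only []
            omega
        · -- push step
          rw [if_neg hC2]
          have hr0 : 0 ≤ r := by omega
          have hCex := not_and.mp hC hr0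
          have hpidxr : pidx lst.length r = r.toNat := by unfold pidx; rw [if_pos hr0]
          have hnbr : pvGetI lst r = lst.getD r.toNat 0 := by
            rw [pvGetI, pvGetD_pidx _ _ _ ⟨by omega, by exact_mod_cast hrlt⟩, hpidxr]
          set nex := pvGetI lst r with hnex
          have hnmem : nex ∈ lst := by
            show pvGetI lst r ∈ lst
            rw [← hnex, hnbr, List.getD_eq_getElem _ _ (by omega)]
            exact List.getElem_mem _
          have hnR : InR n nex := hadj lst hlstmem nex hnmem
          set mw := pidx n nex with hmw
          have hmwn : mw < n := pidx_lt hnR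
          have hnE : ea.getD mw false = false := by
            have hgb : pvGetB ea nex = ea.getD mw false := by
              rw [pvGetB, pvGetD_pidx _ _ _ (by rw [lenE]; exact hnR), lenE]
            rw [← hgb]
            exact Bool.not_eq_true _ ▸ (by simpa using hCex)
          have hsete : PySem.List.pySetD ea nex true = ea.set mw true := by
            rw [pvSetD_pidx _ _ _ (by rw [lenE]; exact hnR), lenE]
          rw [hsete]
          have hstkne : ∀ v ∈ curr :: rest, pidx n v ≠ mw := by
            intro v hv hx
            have := (stkR v hv).2.1
            rw [hx, hnE] at this
            cases this
          have hmwe : e.getD mw false = false := by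
            by_contra hx
            have := mono mw (by revert hx; cases e.getD mw false <;> simp)
            rw [hnE] at this
            cases this
          have hgetset : ∀ c, (ea.set mw true).getD c false = true ↔
              (ea.getD c false = true ∨ c = mw) := by
            intro c
            by_cases hcm : c = mw
            · subst hcm
              rw [getD_set_eq _ _ _ (by rw [lenE]; exact hmwn)]
              simp
            · rw [getD_set_ne _ _ _ (fun hx => hcm hx.symm)]
              simp [hcm]
          apply ih
          · refine ⟨by rw [List.length_set]; exact lenE, lenR, lenL, ?_, ?_, ?_, ?_, ?_, ?_,
              ?_, ?_, ?_, ?_, remle, ?_⟩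
            · intro c hc
              exact (hgetset c).2 (Or.inl (mono c hc))
            · exact (hgetset L).2 (Or.inl hLm)
            · -- sub
              intro c hc
              rcases (hgetset c).1 hc with hc' | hc'
              · exact sub c hc'
              · subst hc'
                right
                have hRAm : RA adj e L m := by
                  rcases sub m hcE with hx | hx
                  · rw [hx] at hce; cases hce
                  · exact hx
                exact RA.tail hRAm (hlstdef ▸ hnmem) hmwe
            · -- stkR
              intro v hv
              rcases List.mem_cons.1 hv with rfl | hv'
              · exact ⟨hnR, (hgetset mw).2 (Or.inr rfl), hmwe, Or.inr ⟨lst, hlstmem, hnmem⟩⟩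
              · obtain ⟨h1, h2, h3, h4⟩ := stkR v hv'
                exact ⟨h1, (hgetset _).2 (Or.inl h2), h3, h4⟩
            · -- stkN
              simp only [List.map_cons, List.nodup_cons] at stkN ⊢
              refine ⟨?_, stkN⟩
              intro hx
              rcases List.mem_cons.1 hx with hx' | hx'
              · exact hstkne curr (by simp) hx'.symm
              · rcases List.mem_map.1 hx' with ⟨v, hv, hve⟩
                exact hstkne v (by simp [hv]) hve
            · -- frames
              intro v hv j hj1 hj2
              rcases List.mem_cons.1 hv with rfl | hv'
              · rw [show pidx n nex = mw from rfl] at hj1 hj2 ⊢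
                have := fresh mw hmwn hnE
                rw [this] at hj1
                omega
              · exact (hgetset _).2 (Or.inl (frames v hv' j hj1 hj2))
            · -- closed
              intro c hcex hcee hcst w hw
              have hcmw : c ≠ mw := by
                intro hx
                apply hcst
                rw [hx]
                simp only [List.map_cons, List.mem_cons]
                exact Or.inl hmw
              rcases (hgetset c).1 hcex with hc' | hc'
              · refine (hgetset _).2 (Or.inl ?_)
                apply closed c hc' hcee _ w hw
                intro hx
                apply hcst
                simp only [List.map_cons, List.mem_cons] at hx ⊢
                right; exact hx
              · exact absurd hc' hcmw
            · -- fin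
              obtain ⟨seg, hfa, hsegN, hsegL, hsegIff⟩ := fin
              refine ⟨seg, hfa, hsegN, hsegL, ?_⟩
              intro c
              rw [hsegIff c]
              constructor
              · rintro ⟨h1, h2, h3⟩
                refine ⟨(hgetset c).2 (Or.inl h1), h2, ?_⟩
                intro hx
                simp only [List.map_cons, List.mem_cons] at hx
                rcases hx with hx | hx
                · subst hx
                  have := (hsegIff (pidx n nex)).2 ⟨h1, h2, h3⟩
                  rw [hnE] at h1
                  cases h1
                · exact h3 (by simpa using hx)
              · rintro ⟨h1, h2, h3⟩
                have hcmw : c ≠ mw := by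
                  intro hx
                  apply h3
                  rw [hx]
                  simp only [List.map_cons, List.mem_cons]
                  exact Or.inl hmw
                rcases (hgetset c).1 h1 with h1' | h1'
                · refine ⟨h1', h2, ?_⟩
                  intro hx
                  apply h3
                  simp only [List.map_cons, List.mem_cons] at hx ⊢
                  right; exact hx
                · exact absurd h1' hcmw
            · -- leadK
              intro c hcnot
              apply leadK
              intro ⟨h1, h2, h3⟩
              apply hcnot
              have hcmw : c ≠ mw := by
                intro hx
                subst hx
                rw [hnE] at h1
                cases h1
              refine ⟨(hgetset c).2 (Or.inl h1), h2, ?_⟩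
              intro hx
              simp only [List.map_cons, List.mem_cons] at hx
              rcases hx with hx | hx
              · exact hcmw hx
              · exact h3 (by simpa using hx)
            · -- leadS
              intro c h1 h2 h3
              have hcmw : c ≠ mw := by
                intro hx
                apply h3
                rw [hx]
                simp only [List.map_cons, List.mem_cons]
                exact Or.inl hmw
              rcases (hgetset c).1 h1 with h1' | h1'
              · apply leadS c h1' h2
                intro hx
                apply h3
                simp only [List.map_cons, List.mem_cons] at hx ⊢
                right; exact hx
              · exact absurd h1' hcmw
            · -- fresh
              intro c hcn hcf
              have hcmw : c ≠ mw := by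
                intro hx
                subst hx
                rw [getD_set_eq _ _ _ (by rw [lenE]; exact hmwn)] at hcf
                cases hcf
              rw [getD_set_ne _ _ _ (fun hx => hcmw hx.symm)] at hcf
              exact fresh c hcn hcf
          · have hcnt := countP_set_true ea mw (by rw [lenE]; exact hmwn) hnE
            unfold muA at hmu ⊢
            simp only [List.length_cons] at hmu ⊢
            omega


lemma sum_remains_le (adj : List (List Int)) :
    ∀ (ra : List Int), ra.length = adj.length →
      (∀ c < adj.length, ra.getD c 0 < ((adj.getD c []).length : Int)) →
      (ra.map (fun r => (r + 1).toNat)).sum ≤ (adj.map List.length).sum := by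
  induction adj with
  | nil =>
    intro ra hlen _
    rw [List.length_nil, List.length_eq_zero_iff] at hlen
    subst hlen
    simp
  | cons lst t ih =>
    intro ra hlen hle
    match ra with
    | [] => simp at hlen
    | r :: rt =>
      have h0 := hle 0 (by simp)
      simp only [List.getD_cons_zero] at h0
      have hrt := ih rt (by simpa using hlen) (by
        intro c hc
        have := hle (c + 1) (by simpa using Nat.succ_lt_succ hc)
        simpa using this)
      simp only [List.map_cons, List.sum_cons]
      have : (r + 1).toNat ≤ lst.length := by omega
      omega

-- running one whole DFS block of A's machine: what the state looks like afterwards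
lemma Ablock_run (adj : List (List Int)) (hadj : AdjOK adj) (e : List Bool)
    (rem fin0 lead0 : List Int) (v0 : Int)
    (hlenE : e.length = adj.length) (hlenR : rem.length = adj.length)
    (hlenL : lead0.length = adj.length)
    (hv0 : InR adj.length v0) (hve : e.getD (pidx adj.length v0) false = false)
    (hremle : ∀ c < adj.length, rem.getD c 0 < ((adj.getD c []).length : Int))
    (hfresh : ∀ c < adj.length, e.getD c false = false →
      rem.getD c 0 = ((adj.getD c []).length : Int) - 1) :
    let L := pidx adj.length v0
    let s1 := loopA adj v0 (dfsFuel adj) ⟨[v0], PySem.List.pySetD e v0 true, rem, fin0, lead0⟩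
    s1.explored.length = adj.length ∧ s1.remains.length = adj.length ∧
    s1.lead.length = adj.length ∧
    (∀ c, s1.explored.getD c false = true ↔ (e.getD c false = true ∨ RA adj e L c)) ∧
    (∀ c, RA adj e L c → s1.lead.getD c 0 = v0) ∧
    (∀ c, ¬ RA adj e L c → s1.lead.getD c 0 = lead0.getD c 0) ∧
    (∃ seg, s1.finish = fin0 ++ seg ∧ (seg.map (fun v => pidx adj.length v)).Nodup ∧
      (∀ v ∈ seg, InR adj.length v ∧ (v = v0 ∨ ∃ lst ∈ adj, v ∈ lst)) ∧
      (∀ c, c ∈ seg.map (fun v => pidx adj.length v) ↔ RA adj e L c)) ∧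
    (∀ c < adj.length, s1.remains.getD c 0 < ((adj.getD c []).length : Int)) ∧
    (∀ c < adj.length, s1.explored.getD c false = false →
      s1.remains.getD c 0 = ((adj.getD c []).length : Int) - 1) := by
  intro L s1
  have hLn : L < adj.length := pidx_lt hv0
  have hsete : PySem.List.pySetD e v0 true = e.set L true := by
    rw [pvSetD_pidx _ _ _ (by rw [hlenE]; exact hv0), hlenE]
  have hgetset : ∀ c, (e.set L true).getD c false = true ↔ (e.getD c false = true ∨ c = L) := by
    intro c
    by_cases hcm : c = L
    · subst hcm
      rw [getD_set_eq _ _ _ (by rw [hlenE]; exact hLn)]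
      simp
    · rw [getD_set_ne _ _ _ (fun hx => hcm hx.symm)]
      simp [hcm]
  have hinit : ABlk adj e L v0 v0 lead0 fin0
      ⟨[v0], PySem.List.pySetD e v0 true, rem, fin0, lead0⟩ := by
    rw [hsete]
    refine ⟨by rw [List.length_set]; exact hlenE, hlenR, hlenL, ?_, ?_, ?_, ?_, by simp, ?_,
      ?_, ⟨[], by simp, by simp, by simp, ?_⟩, ?_, ?_, hremle, ?_⟩
    · intro c hc; exact (hgetset c).2 (Or.inl hc)
    · exact (hgetset L).2 (Or.inr rfl)
    · intro c hc
      rcases (hgetset c).1 hc with hc' | hc'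
      · exact Or.inl hc'
      · subst hc'; exact Or.inr RA.refl
    · intro v hv
      rw [List.mem_singleton] at hv
      subst hv
      exact ⟨hv0, (hgetset L).2 (Or.inr rfl), hve, Or.inl rfl⟩
    · intro v hv j hj1 hj2
      rw [List.mem_singleton] at hv
      rw [show pidx adj.length v = L from by rw [hv]] at hj1 hj2
      rw [hfresh L hLn hve] at hj1
      exact absurd hj2 (by omega)
    · intro c hcex hcee hcst w hw
      rcases (hgetset c).1 hcex with hc' | hc'
      · rw [hc'] at hcee; cases hcee
      · subst hc'
        exact absurd (by simp only [List.map_cons, List.map_nil]; exact List.mem_singleton.2 rfl : L ∈ List.map (fun v => pidx adj.length v) [v0]) hcst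
    · intro c
      simp only [List.map_nil, List.not_mem_nil, false_iff]
      rintro ⟨h1, h2, h3⟩
      rcases (hgetset c).1 h1 with hc' | hc'
      · rw [hc'] at h2; cases h2
      · subst hc'
        exact h3 (by simp only [List.map_cons, List.map_nil]; exact List.mem_singleton.2 rfl)
    · intro c _; rfl
    · intro c h1 h2 h3
      rcases (hgetset c).1 h1 with hc' | hc'
      · rw [hc'] at h2; cases h2
      · subst hc'
        exact absurd (by simp only [List.map_cons, List.map_nil]; exact List.mem_singleton.2 rfl : L ∈ List.map (fun v => pidx adj.length v) [v0]) h3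
    · intro c hcn hcf
      have hcm : c ≠ L := by
        intro hx
        subst hx
        rw [getD_set_eq _ _ _ (by rw [hlenE]; exact hLn)] at hcf
        cases hcf
      rw [getD_set_ne _ _ _ (fun hx => hcm hx.symm)] at hcf
      exact hfresh c hcn hcf
  have hmu : muA ⟨[v0], PySem.List.pySetD e v0 true, rem, fin0, lead0⟩ ≤ dfsFuel adj := by
    unfold muA dfsFuel
    simp only [List.length_cons, List.length_nil]
    have h1 := sum_remains_le adj rem hlenR hremle
    have h2 : (PySem.List.pySetD e v0 true).countP (fun b => !b)
        ≤ (PySem.List.pySetD e v0 true).length := List.countP_le_length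
    rw [PySem.List.length_pySetD, hlenE] at h2
    omega
  obtain ⟨hst, hA⟩ := loopA_run adj hadj e L v0 v0 lead0 fin0 (dfsFuel adj) _ hinit hmu
  obtain ⟨lenE, lenR, lenL, mono, hLm, sub, stkR, stkN, frames, closed, fin, leadK, leadS,
    remle, fresh⟩ := hA
  have hRAexp : ∀ c, RA adj e L c → s1.explored.getD c false = true := by
    intro c hc
    induction hc with
    | refl => exact hLm
    | tail hr hw hu ihc =>
      next cc w =>
      have hccee : e.getD cc false = false := RA_ne_e hve hr
      exact closed cc ihc hccee (by rw [hst]; simp) w hw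
  have hiff : ∀ c, s1.explored.getD c false = true ↔ (e.getD c false = true ∨ RA adj e L c) := by
    intro c
    constructor
    · exact sub c
    · rintro (hc | hc)
      · exact mono c hc
      · exact hRAexp c hc
  refine ⟨lenE, lenR, lenL, hiff, ?_, ?_, ?_, remle, fresh⟩
  · intro c hc
    exact leadS c (hRAexp c hc) (RA_ne_e hve hc) (by rw [hst]; simp)
  · intro c hc
    apply leadK
    rintro ⟨h1, h2, _⟩
    rcases sub c h1 with h' | h'
    · rw [h'] at h2; cases h2
    · exact hc h'
  · obtain ⟨seg, hs1, hN, hL2, hIff⟩ := fin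
    refine ⟨seg, hs1, hN, hL2, ?_⟩
    intro c
    rw [hIff c]
    constructor
    · rintro ⟨h1, h2, _⟩
      rcases sub c h1 with h' | h'
      · rw [h'] at h2; cases h2
      · exact h'
    · intro hc
      exact ⟨hRAexp c hc, RA_ne_e hve hc, by rw [hst]; simp⟩


-- one BFS expansion: marking and enqueueing the unseen neighbours of one vertex
lemma bfs_inner (adj : List (List Int)) (lst : List Int)
    (hlst : ∀ w ∈ lst, InR adj.length w) :
    ∀ (s : List Bool) (q : List Int), s.length = adj.length →
      ∃ (ts : List Int) (s2 : List Bool),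
        (lst.foldl (fun (sq : List Bool × List Int) w =>
          if pvGetB sq.1 w = true then sq
          else (PySem.List.pySetD sq.1 w true, sq.2 ++ [w])) (s, q)) = (s2, q ++ ts) ∧
        s2.length = adj.length ∧
        (∀ c, s2.getD c false = true ↔
          (s.getD c false = true ∨ c ∈ ts.map (fun v => pidx adj.length v))) ∧
        (ts.map (fun v => pidx adj.length v)).Nodup ∧
        (∀ v ∈ ts, v ∈ lst ∧ s.getD (pidx adj.length v) false = false) ∧
        (∀ w ∈ lst, s2.getD (pidx adj.length w) false = true) := by
  induction lst with
  | nil =>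
    intro s q hlen
    exact ⟨[], s, by simp, hlen, by simp, by simp, by simp, by simp⟩
  | cons w lw ih =>
    intro s q hlen
    have hwR : InR adj.length w := hlst w (by simp)
    have hmw : pidx adj.length w < adj.length := pidx_lt hwR
    have hgb : pvGetB s w = s.getD (pidx adj.length w) false := by
      rw [pvGetB, pvGetD_pidx _ _ _ (by rw [hlen]; exact hwR), hlen]
    have hlw : ∀ v ∈ lw, InR adj.length v := fun v hv => hlst v (by simp [hv])
    simp only [List.foldl_cons]
    by_cases hC : pvGetB s w = true
    · rw [if_pos hC]
      obtain ⟨ts, s2, hfold, h1, h2, h3, h4, h5⟩ := ih hlw s q hlen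
      refine ⟨ts, s2, hfold, h1, h2, h3, ?_, ?_⟩
      · intro v hv
        obtain ⟨hv1, hv2⟩ := h4 v hv
        exact ⟨by simp [hv1], hv2⟩
      · intro u hu
        rcases List.mem_cons.1 hu with rfl | hu'
        · exact (h2 _).2 (Or.inl (by rw [← hgb]; exact hC))
        · exact h5 u hu'
    · rw [if_neg hC]
      have hwf : s.getD (pidx adj.length w) false = false := by
        rw [← hgb]; exact Bool.not_eq_true _ ▸ (by simpa using hC)
      have hsete : PySem.List.pySetD s w true = s.set (pidx adj.length w) true := by
        rw [pvSetD_pidx _ _ _ (by rw [hlen]; exact hwR), hlen]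
      rw [hsete]
      have hgetset : ∀ c, (s.set (pidx adj.length w) true).getD c false = true ↔
          (s.getD c false = true ∨ c = pidx adj.length w) := by
        intro c
        by_cases hcm : c = pidx adj.length w
        · subst hcm
          rw [getD_set_eq _ _ _ (by rw [hlen]; exact hmw)]
          simp
        · rw [getD_set_ne _ _ _ (fun hx => hcm hx.symm)]
          simp [hcm]
      obtain ⟨ts, s2, hfold, h1, h2, h3, h4, h5⟩ :=
        ih hlw (s.set (pidx adj.length w) true) (q ++ [w]) (by rw [List.length_set]; exact hlen)
      refine ⟨w :: ts, s2, by rw [hfold, List.append_assoc]; rfl, h1, ?_, ?_, ?_, ?_⟩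
      · intro c
        rw [h2 c, hgetset c]
        simp only [List.map_cons, List.mem_cons]
        tauto
      · simp only [List.map_cons, List.nodup_cons]
        refine ⟨?_, h3⟩
        intro hx
        rcases List.mem_map.1 hx with ⟨v, hv, hve⟩
        have := (h4 v hv).2
        rw [hve, getD_set_eq _ _ _ (by rw [hlen]; exact hmw)] at this
        cases this
      · intro v hv
        rcases List.mem_cons.1 hv with rfl | hv'
        · exact ⟨by simp, hwf⟩
        · obtain ⟨hv1, hv2⟩ := h4 v hv'
          refine ⟨by simp [hv1], ?_⟩
          by_cases hcm : pidx adj.length v = pidx adj.length w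
          · rw [hcm]; exact hwf
          · rw [getD_set_ne _ _ _ (fun hx => hcm hx.symm)] at hv2
            exact hv2
      · intro u hu
        rcases List.mem_cons.1 hu with rfl | hu'
        · exact (h2 _).2 (Or.inl ((hgetset _).2 (Or.inr rfl)))
        · exact h5 u hu'

-- running B's BFS flood fill to completion: it marks exactly the reachable-through-unexplored set
lemma bfsLoop_run (adj : List (List Int)) (hadj : AdjOK adj) (e : List Bool) (L : Nat)
    (hLe : e.getD L false = false) :
    ∀ (fuel : Nat) (q : List Int) (h : Int) (s : List Bool),
      s.length = adj.length →
      (∀ c, e.getD c false = true → s.getD c false = true) →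
      s.getD L false = true →
      (∀ c, s.getD c false = true → e.getD c false = true ∨ RA adj e L c) →
      (∀ v ∈ q, InR adj.length v) →
      (∀ c, (s.getD c false = true ∧ e.getD c false = false) ↔
        c ∈ q.map (fun v => pidx adj.length v)) →
      (q.map (fun v => pidx adj.length v)).Nodup →
      0 ≤ h → h.toNat ≤ q.length →
      (∀ i < h.toNat, ∀ w ∈ adj.getD (pidx adj.length (q.getD i 0)) [],
        s.getD (pidx adj.length w) false = true) →
      adj.length + 1 - h.toNat ≤ fuel →
      (bfsLoop adj fuel q h s).2.length = adj.length ∧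
      (∀ c, (bfsLoop adj fuel q h s).2.getD c false = true ↔
        (e.getD c false = true ∨ RA adj e L c)) ∧
      ((bfsLoop adj fuel q h s).1.map (fun v => pidx adj.length v)).Nodup ∧
      (∀ c, c ∈ (bfsLoop adj fuel q h s).1.map (fun v => pidx adj.length v) ↔ RA adj e L c) := by
  intro fuel
  induction fuel with
  | zero =>
    intro q h s hlen hmono hLm hsub hqR hqiff hqN hh0 hhq hproc hfuel
    have hcells : ∀ x ∈ q.map (fun v => pidx adj.length v), x < adj.length := by
      intro x hx
      rcases List.mem_map.1 hx with ⟨v, hv, hve⟩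
      rw [← hve]
      exact pidx_lt (hqR v hv)
    have := nodup_lt_length_le _ adj.length hqN hcells
    rw [List.length_map] at this
    omega
  | succ fuel ih =>
    intro q h s hlen hmono hLm hsub hqR hqiff hqN hh0 hhq hproc hfuel
    have hlenq : PySem.List.len q = (q.length : Int) := PySem.List.len_eq q
    simp only [bfsLoop, hlenq]
    by_cases hC : h < (q.length : Int)
    · rw [if_pos hC]
      set u := PySem.List.pyGetD q h 0 with hudef
      have hu : u = q.getD h.toNat 0 := by
        rw [hudef, pvGetD_pidx q h 0 ⟨by omega, hC⟩]
        congr 1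
        unfold pidx
        rw [if_pos hh0]
      have humem : u ∈ q := by
        rw [hu, List.getD_eq_getElem _ _ (by omega)]
        exact List.getElem_mem _
      have huR : InR adj.length u := hqR u humem
      set cu := pidx adj.length u with hcu
      have hcun : cu < adj.length := pidx_lt huR
      have hcumem : cu ∈ q.map (fun v => pidx adj.length v) := List.mem_map_of_mem humem
      have hcuM := (hqiff cu).2 hcumem
      have hRAcu : RA adj e L cu := by
        rcases hsub cu hcuM.1 with hx | hx
        · rw [hx] at hcuM; exact absurd hcuM.2 (by simp)
        · exact hx
      set lst := adj.getD cu [] with hlstdef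
      have hlstmem : lst ∈ adj := by
        rw [hlstdef, List.getD_eq_getElem _ _ hcun]; exact List.getElem_mem _
      have hlstR : ∀ w ∈ lst, InR adj.length w := fun w hw => hadj lst hlstmem w hw
      have hlstv : pvGetL adj u = lst := by
        rw [pvGetL, pvGetD_pidx _ _ _ huR]
      rw [hlstv]
      obtain ⟨ts, s2, hfold, h1, h2, h3, h4, h5⟩ := bfs_inner adj lst hlstR s q hlen
      rw [hfold]
      apply ih
      · exact h1
      · intro c hc; exact (h2 c).2 (Or.inl (hmono c hc))
      · exact (h2 L).2 (Or.inl hLm)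
      · intro c hc
        rcases (h2 c).1 hc with hc' | hc'
        · exact hsub c hc'
        · rcases List.mem_map.1 hc' with ⟨v, hv, hve⟩
          obtain ⟨hv1, hv2⟩ := h4 v hv
          have hvee : e.getD (pidx adj.length v) false = false := by
            by_contra hx
            have := hmono (pidx adj.length v) (by revert hx; cases e.getD (pidx adj.length v) false <;> simp)
            rw [hv2] at this; cases this
          rw [← hve]
          exact Or.inr (RA.tail hRAcu (hlstdef ▸ hv1) hvee)
      · intro v hv
        rcases List.mem_append.1 hv with hv' | hv'
        · exact hqR v hv'
        · exact hlstR v (h4 v hv').1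
      · intro c
        rw [List.map_append, List.mem_append]
        constructor
        · rintro ⟨hc1, hc2⟩
          rcases (h2 c).1 hc1 with hc' | hc'
          · exact Or.inl ((hqiff c).1 ⟨hc', hc2⟩)
          · exact Or.inr hc'
        · rintro (hc | hc)
          · have := (hqiff c).2 hc
            exact ⟨(h2 c).2 (Or.inl this.1), this.2⟩
          · rcases List.mem_map.1 hc with ⟨v, hv, hve⟩
            obtain ⟨hv1, hv2⟩ := h4 v hv
            refine ⟨(h2 c).2 (Or.inr hc), ?_⟩
            rw [← hve]
            by_contra hx
            have := hmono (pidx adj.length v) (by revert hx; cases e.getD (pidx adj.length v) false <;> simp)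
            rw [hv2] at this; cases this
      · rw [List.map_append, List.nodup_append]
        refine ⟨hqN, h3, ?_⟩
        intro a ha b hb hab
        subst hab
        have hma := (hqiff a).2 ha
        rcases List.mem_map.1 hb with ⟨v, hv, hve⟩
        have := (h4 v hv).2
        rw [hve] at this
        rw [this] at hma
        exact absurd hma.1 (by simp)
      · omega
      · have : (h + 1).toNat = h.toNat + 1 := by omega
        rw [this, List.length_append]
        omega
      · intro i hi w hw
        have hi1 : (h + 1).toNat = h.toNat + 1 := by omega
        rw [hi1] at hi
        rcases Nat.lt_or_ge i h.toNat with hilt | hige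
        · have hgetq : (q ++ ts).getD i 0 = q.getD i 0 := by
            rw [List.getD_append _ _ _ _ (by omega)]
          rw [hgetq] at hw
          exact (h2 _).2 (Or.inl (hproc i hilt w hw))
        · have hieq : i = h.toNat := by omega
          subst hieq
          have hgetq : (q ++ ts).getD h.toNat 0 = q.getD h.toNat 0 := by
            rw [List.getD_append _ _ _ _ (by omega)]
          rw [hgetq, ← hu] at hw
          exact h5 w hw
      · have : (h + 1).toNat = h.toNat + 1 := by omega
        omega
    · rw [if_neg hC]
      have hheq : h.toNat = q.length := by omega
      have hRAm : ∀ c, RA adj e L c → s.getD c false = true := by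
        intro c hc
        induction hc with
        | refl => exact hLm
        | tail hr hw hu ihc =>
          next cc w =>
          have hccee : e.getD cc false = false := RA_ne_e hLe hr
          have hcq : cc ∈ q.map (fun v => pidx adj.length v) := (hqiff cc).1 ⟨ihc, hccee⟩
          rcases List.mem_map.1 hcq with ⟨v, hv, hve⟩
          obtain ⟨i, hi, hiv⟩ := List.mem_iff_getElem.1 hv
          have := hproc i (by omega) w (by
            rw [List.getD_eq_getElem _ _ hi, hiv, hve]
            exact hw)
          exact this
      refine ⟨hlen, ?_, hqN, ?_⟩
      · intro c
        constructor
        · exact hsub c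
        · rintro (hc | hc)
          · exact hmono c hc
          · exact hRAm c hc
      · intro c
        rw [← hqiff c]
        constructor
        · rintro ⟨h1, h2⟩
          rcases hsub c h1 with hx | hx
          · rw [hx] at h2; cases h2
          · exact hx
        · intro hc
          exact ⟨hRAm c hc, RA_ne_e hLe hc⟩


lemma bool_eq_of_iff {a b : Bool} (h : a = true ↔ b = true) : a = b := by
  cases a <;> cases b <;> simp_all

-- ===== Part III: the synchronized second pass — A's DFS blocks and B's BFS blocks build the
-- same partition into components =====

-- blocks specification tying A's lead array and B's sizes list together
def BlocksOK (adj : List (List Int)) (a : KosaA) (sizes : List Int)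
    (bl : List (Int × List Nat)) : Prop :=
  sizes = bl.map (fun p => ((p.2.length : Nat) : Int)) ∧
  (bl.map Prod.fst).Nodup ∧
  (∀ p ∈ bl, (0 ≤ p.1 ∧ p.1 < (adj.length : Int)) ∧ p.2.Nodup ∧ p.1.toNat ∈ p.2 ∧
    ∀ c ∈ p.2, c < adj.length) ∧
  (∀ c, a.explored.getD c false = true ↔ ∃ p ∈ bl, c ∈ p.2) ∧
  (∀ p ∈ bl, ∀ c ∈ p.2, a.lead.getD c 0 = p.1) ∧
  (∀ c < adj.length, a.explored.getD c false = false → a.lead.getD c 0 = (c : Int))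

structure Inv2 (adj : List (List Int)) (a : KosaA) (b : List Bool × List Int) : Prop where
  lenE : a.explored.length = adj.length
  lenR : a.remains.length = adj.length
  lenS : b.1.length = adj.length
  lenL : a.lead.length = adj.length
  same : ∀ c, a.explored.getD c false = b.1.getD c false
  remle : ∀ c < adj.length, a.remains.getD c 0 < ((adj.getD c []).length : Int)
  fresh : ∀ c < adj.length, a.explored.getD c false = false →
    a.remains.getD c 0 = ((adj.getD c []).length : Int) - 1
  blocks : ∃ bl, BlocksOK adj a b.2 bl

lemma pass2_sim (adj : List (List Int)) (hadj : AdjOK adj) :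
    ∀ (roots : List Int), (∀ v ∈ roots, 0 ≤ v ∧ v < (adj.length : Int)) →
    ∀ (a : KosaA) (b : List Bool × List Int), Inv2 adj a b →
    Inv2 adj
      (roots.foldl (fun (s : KosaA) leader =>
        loopA adj leader (dfsFuel adj)
          ⟨if pvGetB s.explored leader then [] else [leader],
           PySem.List.pySetD s.explored leader true, s.remains, s.finish, s.lead⟩) a)
      (roots.foldl (fun (ss : List Bool × List Int) v =>
        if pvGetB ss.1 v then ss
        else
          ((bfsLoop adj (adj.length + 1) [v] 0 (PySem.List.pySetD ss.1 v true)).2,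
            ss.2 ++ [PySem.List.len (bfsLoop adj (adj.length + 1) [v] 0
              (PySem.List.pySetD ss.1 v true)).1])) b)
    ∧ (∀ c, a.explored.getD c false = true →
        (roots.foldl (fun (s : KosaA) leader =>
          loopA adj leader (dfsFuel adj)
            ⟨if pvGetB s.explored leader then [] else [leader],
             PySem.List.pySetD s.explored leader true, s.remains, s.finish, s.lead⟩) a).explored.getD c false = true)
    ∧ (∀ v ∈ roots,
        (roots.foldl (fun (s : KosaA) leader =>
          loopA adj leader (dfsFuel adj)
            ⟨if pvGetB s.explored leader then [] else [leader],
             PySem.List.pySetD s.explored leader true, s.remains, s.finish, s.lead⟩) a).explored.getD (pidx adj.length v) false = true) := by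
  intro roots
  induction roots with
  | nil =>
    intro _ a b h
    exact ⟨h, fun c hc => hc, by simp⟩
  | cons v t ih =>
    intro hroots a b hI
    have hv : 0 ≤ v ∧ v < (adj.length : Int) := hroots v (by simp)
    have hvR : InR adj.length v := ⟨by omega, hv.2⟩
    set L := pidx adj.length v with hL
    have hLv : L = v.toNat := by rw [hL]; unfold pidx; rw [if_pos hv.1]
    have hLn : L < adj.length := pidx_lt hvR
    have htr : ∀ u ∈ t, 0 ≤ u ∧ u < (adj.length : Int) := fun u hu => hroots u (by simp [hu])
    obtain ⟨lenE, lenR, lenS, lenL, same, remle, fresh, bl, hsz, hndl, hper, hexp, hlead,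
      huntouched⟩ := hI
    have hgetA : pvGetB a.explored v = a.explored.getD L false := by
      rw [pvGetB, pvGetD_pidx _ _ _ (by rw [lenE]; exact hvR), lenE]
    have hgetB : pvGetB b.1 v = b.1.getD L false := by
      rw [pvGetB, pvGetD_pidx _ _ _ (by rw [lenS]; exact hvR), lenS]
    simp only [List.foldl_cons]
    by_cases hE : a.explored.getD L false = true
    · -- already explored: both sides skip
      have hEB : pvGetB b.1 v = true := by rw [hgetB, ← same]; exact hE
      have hEA : pvGetB a.explored v = true := by rw [hgetA]; exact hE
      rw [if_pos hEB, if_pos hEA]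
      have hnoop : PySem.List.pySetD a.explored v true = a.explored := by
        rw [pvSetD_pidx _ _ _ (by rw [lenE]; exact hvR), lenE]
        exact set_true_of_getD_true _ _ hE
      rw [hnoop, loopA_nil]
      obtain ⟨h1, h2, h3⟩ := ih htr ⟨[], a.explored, a.remains, a.finish, a.lead⟩ b
        ⟨lenE, lenR, lenS, lenL, same, remle, fresh, bl, hsz, hndl, hper, hexp, hlead, huntouched⟩
      refine ⟨h1, h2, ?_⟩
      intro u hu
      rcases List.mem_cons.1 hu with rfl | hu'
      · exact h2 L hE
      · exact h3 u hu'
    · -- fresh leader: run one DFS block on A and one BFS block on B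
      have hEf : a.explored.getD L false = false := by
        revert hE; cases a.explored.getD L false <;> simp
      have hEBf : b.1.getD L false = false := by rw [← same]; exact hEf
      have hEB : ¬ pvGetB b.1 v = true := by rw [hgetB, hEBf]; simp
      have hEA : ¬ pvGetB a.explored v = true := by rw [hgetA, hEf]; simp
      rw [if_neg hEB, if_neg hEA]
      -- A block
      obtain ⟨alenE, alenR, alenL, haiff, hlv, hlK, ⟨seg, hfin, hsegN, hsegL, hsegIff⟩,
        hremle', hfresh'⟩ :=
        Ablock_run adj hadj a.explored a.remains a.finish a.lead v lenE lenR lenL hvR hEf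
          remle fresh
      -- B block
      have hsetB : PySem.List.pySetD b.1 v true = b.1.set L true := by
        rw [pvSetD_pidx _ _ _ (by rw [lenS]; exact hvR), lenS]
      have hgetsetB : ∀ c, (b.1.set L true).getD c false = true ↔
          (b.1.getD c false = true ∨ c = L) := by
        intro c
        by_cases hcm : c = L
        · subst hcm
          rw [getD_set_eq _ _ _ (by rw [lenS]; exact hLn)]
          simp
        · rw [getD_set_ne _ _ _ (fun hx => hcm hx.symm)]
          simp [hcm]
      obtain ⟨blenS, hbiff, hbN, hbcells⟩ :=
        bfsLoop_run adj hadj b.1 L hEBf (adj.length + 1) [v] 0 (PySem.List.pySetD b.1 v true)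
          (by rw [hsetB, List.length_set]; exact lenS)
          (by intro c hc; rw [hsetB]; exact (hgetsetB c).2 (Or.inl hc))
          (by rw [hsetB]; exact (hgetsetB L).2 (Or.inr rfl))
          (by
            intro c hc
            rw [hsetB] at hc
            rcases (hgetsetB c).1 hc with hc' | hc'
            · exact Or.inl hc'
            · subst hc'; exact Or.inr RA.refl)
          (by intro u hu; rw [List.mem_singleton.1 hu]; exact hvR)
          (by
            intro c
            rw [hsetB]
            simp only [List.map_cons, List.map_nil, List.mem_singleton]
            constructor
            · rintro ⟨h1, h2⟩
              rcases (hgetsetB c).1 h1 with hc' | hc'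
              · rw [hc'] at h2; cases h2
              · exact hc'.symm ▸ rfl
            · intro hc
              rw [hc]
              exact ⟨(hgetsetB L).2 (Or.inr rfl), hEBf⟩)
          (by simp)
          (by omega)
          (by rw [Int.toNat_zero]; simp)
          (by intro i hi; rw [Int.toNat_zero] at hi; omega)
          (by rw [Int.toNat_zero]; omega)
      -- relate the two reachability bases
      have hRAiff : ∀ c, RA adj a.explored L c ↔ RA adj b.1 L c :=
        fun c => ⟨RA_congr same, RA_congr (fun j => (same j).symm)⟩
      set s1 := loopA adj v (dfsFuel adj)
        ⟨[v], PySem.List.pySetD a.explored v true, a.remains, a.finish, a.lead⟩ with hs1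
      set qs := bfsLoop adj (adj.length + 1) [v] 0 (PySem.List.pySetD b.1 v true) with hqs
      have hsame' : ∀ c, s1.explored.getD c false = qs.2.getD c false := by
        intro c
        apply bool_eq_of_iff
        rw [haiff c, hbiff c, hRAiff c, same c]
      have hncells : ∀ c ∈ qs.1.map (fun u => pidx adj.length u), c < adj.length := by
        intro c hc
        exact RA_lt hadj hLn (RA_congr (fun j => (same j).symm) ((hbcells c).1 hc))
      -- the new block
      have hnext : Inv2 adj s1 (qs.2, b.2 ++ [PySem.List.len qs.1]) := by
        refine ⟨alenE, alenR, blenS, alenL, hsame', hremle', hfresh',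
          bl ++ [(v, qs.1.map (fun u => pidx adj.length u))], ?_, ?_, ?_, ?_, ?_, ?_⟩
        · -- sizes
          simp [hsz, PySem.List.len_eq, List.map_append]
        · -- leaders nodup
          rw [List.map_append]
          simp only [List.map_cons, List.map_nil]
          rw [List.nodup_append]
          refine ⟨hndl, by simp, ?_⟩
          intro p hp p' hp'
          rw [List.mem_singleton] at hp'
          subst hp'
          intro hpv
          rcases List.mem_map.1 hp with ⟨pp, hpp, hppe⟩
          have hLpp : L ∈ pp.2 := by
            rw [hLv, ← hpv, ← hppe]
            exact ((hper pp hpp).2.2.1)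
          have : a.explored.getD L false = true := (hexp L).2 ⟨pp, hpp, hLpp⟩
          rw [hEf] at this
          cases this
        · -- per-block facts
          intro p hp
          rcases List.mem_append.1 hp with hp' | hp'
          · exact hper p hp'
          · rw [List.mem_singleton] at hp'
            subst hp'
            refine ⟨⟨hv.1, hv.2⟩, hbN, ?_, ?_⟩
            · rw [← hLv]
              exact (hbcells L).2 RA.refl
            · intro c hc
              exact hncells c hc
        · -- explored iff blocks
          intro c
          rw [haiff c]
          constructor
          · rintro (hc | hc)
            · obtain ⟨p, hp, hcp⟩ := (hexp c).1 hc
              exact ⟨p, List.mem_append.2 (Or.inl hp), hcp⟩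
            · refine ⟨(v, qs.1.map (fun u => pidx adj.length u)),
                List.mem_append.2 (Or.inr (by simp)), ?_⟩
              exact (hbcells c).2 ((hRAiff c).1 hc)
          · rintro ⟨p, hp, hcp⟩
            rcases List.mem_append.1 hp with hp' | hp'
            · exact Or.inl ((hexp c).2 ⟨p, hp', hcp⟩)
            · rw [List.mem_singleton] at hp'
              subst hp'
              exact Or.inr ((hRAiff c).2 ((hbcells c).1 hcp))
        · -- lead values
          intro p hp c hc
          rcases List.mem_append.1 hp with hp' | hp'
          · have hce : a.explored.getD c false = true := (hexp c).2 ⟨p, hp', hc⟩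
            have hnra : ¬ RA adj a.explored L c := by
              intro hx
              have := RA_ne_e hEf hx
              rw [hce] at this
              cases this
            rw [hlK c hnra]
            exact hlead p hp' c hc
          · rw [List.mem_singleton] at hp'
            subst hp'
            exact hlv c ((hRAiff c).2 ((hbcells c).1 hc))
        · -- untouched cells
          intro c hcn hcf
          have hnc : ¬ (a.explored.getD c false = true ∨ RA adj a.explored L c) := fun hx => by
            have := (haiff c).2 hx
            rw [hcf] at this
            exact absurd this (by simp)
          have haf : a.explored.getD c false = false := by
            cases h : a.explored.getD c false
            · rfl
            · exact absurd (Or.inl h) hnc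
          rw [hlK c (fun hx => hnc (Or.inr hx))]
          exact huntouched c hcn haf
      obtain ⟨h1, h2, h3⟩ := ih htr s1 (qs.2, b.2 ++ [PySem.List.len qs.1]) hnext
      refine ⟨h1, ?_, ?_⟩
      · intro c hc
        exact h2 c ((haiff c).2 (Or.inl hc))
      · intro u hu
        rcases List.mem_cons.1 hu with rfl | hu'
        · exact h2 (pidx adj.length u) ((haiff _).2 (Or.inr RA.refl))
        · exact h3 u hu'


-- ===== Part IV: the reversed graph, A's grouping loop, pass-1 coverage, counting, selection =====

lemma enumerate_eq (xss : List (List Int)) : ∀ s : Int,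
    PySem.List.enumerate xss s
      = (List.range xss.length).map (fun (i : Nat) => ((s + (i : Int), xss.getD i []) : Int × List Int)) := by
  induction xss with
  | nil => intro s; rfl
  | cons x t ih =>
    intro s
    rw [PySem.List.enumerate_cons, ih (s + 1), List.length_cons, List.range_succ_eq_map]
    simp only [List.map_cons, List.map_map, Nat.cast_zero, add_zero, List.getD_cons_zero]
    congr 1
    apply List.map_congr_left
    intro i _
    simp only [Function.comp_apply, List.getD_cons_succ]
    rw [Prod.ext_iff]
    refine ⟨by push_cast; ring, rfl⟩

lemma enumerate_map_snd {α : Type} (xs : List α) : ∀ s : Int,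
    (PySem.List.enumerate xs s).map Prod.snd = xs := by
  induction xs with
  | nil => intro s; rfl
  | cons x t ih => intro s; rw [PySem.List.enumerate_cons]; simp [ih (s + 1)]

lemma rev_eq (adjlist : List (List Int)) :
    graphReverse adjlist
      = (PySem.List.pyRange 0 adjlist.length 1).foldl
          (fun rev u => (pvGetL adjlist u).foldl
            (fun rev w => PySem.List.pySetD rev w (pvGetL rev w ++ [u])) rev)
          (List.replicate adjlist.length []) := by
  rw [graphReverse, enumerate_eq adjlist 0, PySem.List.pyRange_zero_natCast adjlist.length,
    List.foldl_map, List.foldl_map]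
  apply PySem.List.foldl_congr_mem
  intro acc i hi
  simp only [zero_add]
  congr 1
  rw [pvGetL, PySem.List.pyGetD_natCast]

lemma pySetD_cases {α : Type} (xs : List α) (i : Int) (v : α) :
    PySem.List.pySetD xs i v = xs ∨ ∃ k, PySem.List.pySetD xs i v = xs.set k v := by
  rw [PySem.List.pySetD, PySem.List.pySet?]
  cases PySem.List.pyIdx? xs.length i with
  | none => left; rfl
  | some k => right; exact ⟨k, rfl⟩

lemma pvGetL_cases (xss : List (List Int)) (i : Int) :
    pvGetL xss i = [] ∨ pvGetL xss i ∈ xss := by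
  rw [pvGetL, PySem.List.pyGetD, PySem.List.pyGet?]
  cases hk : PySem.List.pyIdx? xss.length i with
  | none => left; rfl
  | some k =>
    cases hg : xss[k]? with
    | none => left; simp [hg]
    | some lst =>
      right
      simp only [Option.bind_some, hg, Option.getD_some]
      exact List.mem_of_getElem? hg

lemma rev_len_ok (adjlist : List (List Int)) :
    (graphReverse adjlist).length = adjlist.length
    ∧ ∀ lst ∈ graphReverse adjlist, ∀ w ∈ lst, 0 ≤ w ∧ w < (adjlist.length : Int) := by
  rw [rev_eq, PySem.List.pyRange_zero_natCast adjlist.length, List.foldl_map]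
  apply List.foldlRecOn _ _
    (motive := fun (rev : List (List Int)) => rev.length = adjlist.length
      ∧ ∀ lst ∈ rev, ∀ w ∈ lst, 0 ≤ w ∧ w < (adjlist.length : Int))
  · refine ⟨by simp, ?_⟩
    intro lst hl w hw
    rw [List.eq_of_mem_replicate hl] at hw
    cases hw
  · intro rev hrev i hi
    apply List.foldlRecOn _ _
      (motive := fun (rev : List (List Int)) => rev.length = adjlist.length
        ∧ ∀ lst ∈ rev, ∀ w ∈ lst, 0 ≤ w ∧ w < (adjlist.length : Int))
    · exact hrev
    · intro rev2 hrev2 w _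
      refine ⟨by rw [PySem.List.length_pySetD]; exact hrev2.1, ?_⟩
      intro lst hl u hu
      rcases pySetD_cases rev2 w (pvGetL rev2 w ++ [(i : Int)]) with hcase | ⟨k, hcase⟩
      · rw [hcase] at hl; exact hrev2.2 lst hl u hu
      · rw [hcase] at hl
        rcases List.mem_or_eq_of_mem_set hl with hl' | rfl
        · exact hrev2.2 lst hl' u hu
        · rcases List.mem_append.1 hu with hu' | hu'
          · rcases pvGetL_cases rev2 w with hg | hg
            · rw [hg] at hu'; cases hu'
            · exact hrev2.2 _ hg u hu'
          · rw [List.mem_singleton.1 hu']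
            have := List.mem_range.1 hi
            omega

-- A's groups-of-lists sizes equal the counting-dict values, for the same father list
def GInv (groups : List (List Int)) (dic counts : PySem.Dict Int Int) : Prop :=
  counts.items = dic.items.map (fun p => (p.1, ((groups.getD p.2.toNat []).length : Int)))
  ∧ dic.items.map Prod.snd = (List.range groups.length).map (fun (j : Nat) => (j : Int))
  ∧ dic.keys.Nodup

lemma GInv_keys {groups : List (List Int)} {dic counts : PySem.Dict Int Int}
    (h : GInv groups dic counts) : counts.keys = dic.keys := by
  show counts.items.map Prod.fst = dic.items.map Prod.fst
  rw [h.1, List.map_map]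
  rfl

lemma GInv_step (groups : List (List Int)) (dic counts : PySem.Dict Int Int)
    (h : GInv groups dic counts) (idx root : Int) :
    GInv (if dic.contains root then
            PySem.List.pySetD groups (dic.getD root 0)
              (pvGetL groups (dic.getD root 0) ++ [idx])
          else groups ++ [[idx]])
         (if dic.contains root then dic else dic.insert root (groups.length : Int))
         (counts.insert root (counts.getD root 0 + 1)) := by
  obtain ⟨h1, h2, h3⟩ := h
  have hkeys : counts.keys = dic.keys := GInv_keys ⟨h1, h2, h3⟩
  have hck : counts.contains root = dic.contains root := by
    rw [PySem.Dict.contains_eq_decide_mem_keys, PySem.Dict.contains_eq_decide_mem_keys, hkeys]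
  have hcknd : counts.keys.Nodup := by rw [hkeys]; exact h3
  by_cases hc : dic.contains root = true
  · rw [if_pos hc, if_pos hc]
    have hmemk : root ∈ dic.keys := by
      rw [PySem.Dict.contains_eq_decide_mem_keys] at hc
      exact of_decide_eq_true hc
    rcases List.mem_map.1 hmemk with ⟨p0, hp0raw, hp0e⟩
    have hp0 : (root, p0.2) ∈ dic.items := by rw [← hp0e]; exact hp0raw
    have hgi : dic.getD root 0 = p0.2 := PySem.Dict.getD_of_mem_items dic hp0 h3 0
    have hg0mem : p0.2 ∈ dic.items.map Prod.snd := List.mem_map_of_mem hp0raw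
    rw [h2] at hg0mem
    rcases List.mem_map.1 hg0mem with ⟨j, hj, hje⟩
    have hjlt : j < groups.length := List.mem_range.1 hj
    have hp0j : (root, (j : Int)) ∈ dic.items := by rw [hje]; exact hp0
    have hsetg : PySem.List.pySetD groups (dic.getD root 0)
          (pvGetL groups (dic.getD root 0) ++ [idx])
        = groups.set j (groups.getD j [] ++ [idx]) := by
      rw [hgi, ← hje, pvGetL, PySem.List.pyGetD_natCast, PySem.List.pySetD_natCast]
    have hcnt : counts.getD root 0 = ((groups.getD j []).length : Int) := by
      apply PySem.Dict.getD_of_mem_items counts _ hcknd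
      rw [h1]
      have hmm := List.mem_map_of_mem
        (f := fun p : Int × Int => (p.1, ((groups.getD p.2.toNat []).length : Int))) hp0j
      simpa using hmm
    have hvals : (dic.items.map Prod.snd).Nodup := by
      rw [h2]
      exact List.Nodup.map (fun a b hab => by exact_mod_cast hab) List.nodup_range
    refine ⟨?_, ?_, h3⟩
    · rw [PySem.Dict.items_insert, if_pos (by rw [hck]; exact hc), h1, List.map_map, hsetg]
      apply List.map_congr_left
      intro p hp
      simp only [Function.comp_apply]
      by_cases hpr : p.1 = root
      · have hpeq : p = (root, (j : Int)) := nodup_map_mem_inj h3 p hp _ hp0j hpr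
        rw [hpeq]
        rw [if_pos (by simp)]
        simp only [Int.toNat_natCast]
        rw [getD_set_eq _ _ _ hjlt, hcnt]
        rw [List.length_append]
        simp
      · rw [if_neg (by simp [hpr])]
        have hne : p.2.toNat ≠ j := by
          intro hcon
          have hmemv : p.2 ∈ dic.items.map Prod.snd := List.mem_map_of_mem hp
          rw [h2] at hmemv
          rcases List.mem_map.1 hmemv with ⟨j', hj', hj'e⟩
          have hp2 : p.2 = (j : Int) := by
            rw [← hj'e] at hcon ⊢
            simp only [Int.toNat_natCast] at hcon
            rw [hcon]
          have hpeq := nodup_map_mem_inj hvals p hp (root, (j : Int)) hp0j (by simpa using hp2)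
          exact hpr (by rw [hpeq])
        rw [getD_set_ne _ _ _ (fun hx => hne hx.symm)]
    · rw [hsetg, List.length_set]
      exact h2
  · rw [if_neg hc, if_neg hc]
    have hccf : counts.contains root = false := by
      rw [hck]; exact Bool.eq_false_iff.2 (by simpa using hc)
    have hgd0 : counts.getD root 0 = 0 := PySem.Dict.getD_of_not_contains counts 0 hccf
    refine ⟨?_, ?_, ?_⟩
    · rw [PySem.Dict.items_insert, if_neg (by rw [hccf]; simp),
        PySem.Dict.items_insert, if_neg (by simpa using hc), List.map_append, h1]
      congr 1
      · apply List.map_congr_left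
        intro p hp
        have hmemv : p.2 ∈ dic.items.map Prod.snd := List.mem_map_of_mem hp
        rw [h2] at hmemv
        rcases List.mem_map.1 hmemv with ⟨j', hj', hj'e⟩
        have hlt : p.2.toNat < groups.length := by
          rw [← hj'e]; simpa using List.mem_range.1 hj'
        rw [List.getD_append _ _ _ _ hlt]
      · simp only [List.map_cons, List.map_nil, Int.toNat_natCast]
        have hgetl : (groups ++ [[idx]]).getD groups.length [] = [idx] := by
          rw [List.getD_eq_getElem _ _ (by simp)]
          simp
        rw [hgetl, hgd0]
        simp
    · rw [PySem.Dict.items_insert, if_neg (by simpa using hc), List.map_append, h2]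
      have hlen1 : (groups ++ [[idx]]).length = groups.length + 1 := by simp
      rw [hlen1, List.range_succ]
      simp
    · show ((dic.insert root _).items.map Prod.fst).Nodup
      rw [PySem.Dict.items_insert, if_neg (by simpa using hc), List.map_append]
      simp only [List.map_cons, List.map_nil]
      rw [List.nodup_append]
      refine ⟨h3, by simp, ?_⟩
      intro a ha b hb
      rw [List.mem_singleton] at hb
      subst hb
      rintro rfl
      have hct : dic.contains a = true := by
        rw [PySem.Dict.contains_eq_decide_mem_keys]; exact decide_eq_true ha
      rw [hct] at hc
      exact hc rfl

lemma GInv_fold (pairs : List (Int × Int)) :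
    ∀ (groups : List (List Int)) (dic counts : PySem.Dict Int Int), GInv groups dic counts →
    GInv (pairs.foldl (fun (gd : List (List Int) × PySem.Dict Int Int) ir =>
            if gd.2.contains ir.2 then
              let gi := gd.2.getD ir.2 0
              (PySem.List.pySetD gd.1 gi (pvGetL gd.1 gi ++ [ir.1]), gd.2)
            else
              (gd.1 ++ [[ir.1]], gd.2.insert ir.2 (gd.1.length : Int))) (groups, dic)).1
         (pairs.foldl (fun (gd : List (List Int) × PySem.Dict Int Int) ir =>
            if gd.2.contains ir.2 then
              let gi := gd.2.getD ir.2 0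
              (PySem.List.pySetD gd.1 gi (pvGetL gd.1 gi ++ [ir.1]), gd.2)
            else
              (gd.1 ++ [[ir.1]], gd.2.insert ir.2 (gd.1.length : Int))) (groups, dic)).2
         (pairs.foldl (fun (d : PySem.Dict Int Int) p => d.insert p.2 (d.getD p.2 0 + 1)) counts)
    := by
  induction pairs with
  | nil => intro groups dic counts h; simpa using h
  | cons ir t ih =>
    intro groups dic counts h
    simp only [List.foldl_cons]
    have hstep := GInv_step groups dic counts h ir.1 ir.2
    by_cases hc : dic.contains ir.2 = true
    · rw [if_pos hc]
      rw [if_pos hc, if_pos hc] at hstep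
      exact ih _ _ _ hstep
    · rw [if_neg hc]
      rw [if_neg hc, if_neg hc] at hstep
      exact ih _ _ _ hstep

lemma map_range_getD (groups : List (List Int)) :
    (List.range groups.length).map (fun j => (((groups.getD j []).length : Nat) : Int))
      = groups.map (fun g => (g.length : Int)) := by
  apply List.ext_getElem (by simp)
  intro i h1 h2
  simp only [List.getElem_map, List.getElem_range]
  rw [List.getD_eq_getElem _ _ (by simpa using h2)]

lemma group_sizes_eq (father : List Int) :
    (((PySem.List.enumerate father).foldl
      (fun (gd : List (List Int) × PySem.Dict Int Int) ir =>
        if gd.2.contains ir.2 then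
          let gi := gd.2.getD ir.2 0
          (PySem.List.pySetD gd.1 gi (pvGetL gd.1 gi ++ [ir.1]), gd.2)
        else
          (gd.1 ++ [[ir.1]], gd.2.insert ir.2 (gd.1.length : Int)))
      ([], PySem.Dict.empty)).1).map (fun g => (g.length : Int))
    = (father.foldl
        (fun (d : PySem.Dict Int Int) root => d.insert root (d.getD root 0 + 1))
        PySem.Dict.empty).values := by
  have hB : father.foldl
        (fun (d : PySem.Dict Int Int) root => d.insert root (d.getD root 0 + 1))
        PySem.Dict.empty
      = (PySem.List.enumerate father).foldl
        (fun (d : PySem.Dict Int Int) p => d.insert p.2 (d.getD p.2 0 + 1))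
        PySem.Dict.empty := by
    conv_lhs => rw [← enumerate_map_snd father 0]
    rw [List.foldl_map]
  rw [hB]
  have h0 : GInv [] PySem.Dict.empty PySem.Dict.empty := ⟨rfl, rfl, List.nodup_nil⟩
  have hres := GInv_fold (PySem.List.enumerate father 0) [] PySem.Dict.empty PySem.Dict.empty h0
  obtain ⟨h1, h2, h3⟩ := hres
  show _ = PySem.Dict.values _
  rw [PySem.Dict.values, h1, List.map_map]
  have hcomp : (Prod.snd ∘ fun (p : Int × Int) =>
      (p.1, ((((PySem.List.enumerate father 0).foldl
          (fun (gd : List (List Int) × PySem.Dict Int Int) ir =>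
            if gd.2.contains ir.2 then
              let gi := gd.2.getD ir.2 0
              (PySem.List.pySetD gd.1 gi (pvGetL gd.1 gi ++ [ir.1]), gd.2)
            else
              (gd.1 ++ [[ir.1]], gd.2.insert ir.2 (gd.1.length : Int)))
          ([], PySem.Dict.empty)).1.getD p.2.toNat []).length : Int)))
      = (fun (z : Int) => ((((PySem.List.enumerate father 0).foldl
          (fun (gd : List (List Int) × PySem.Dict Int Int) ir =>
            if gd.2.contains ir.2 then
              let gi := gd.2.getD ir.2 0
              (PySem.List.pySetD gd.1 gi (pvGetL gd.1 gi ++ [ir.1]), gd.2)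
            else
              (gd.1 ++ [[ir.1]], gd.2.insert ir.2 (gd.1.length : Int)))
          ([], PySem.Dict.empty)).1.getD z.toNat []).length : Int)) ∘ Prod.snd := rfl
  rw [hcomp, ← List.map_map, h2, List.map_map]
  have : ((fun (z : Int) => ((((PySem.List.enumerate father 0).foldl
          (fun (gd : List (List Int) × PySem.Dict Int Int) ir =>
            if gd.2.contains ir.2 then
              let gi := gd.2.getD ir.2 0
              (PySem.List.pySetD gd.1 gi (pvGetL gd.1 gi ++ [ir.1]), gd.2)
            else
              (gd.1 ++ [[ir.1]], gd.2.insert ir.2 (gd.1.length : Int)))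
          ([], PySem.Dict.empty)).1.getD z.toNat []).length : Int)) ∘ (fun (j : Nat) => (j : Int)))
      = (fun (j : Nat) => ((((PySem.List.enumerate father 0).foldl
          (fun (gd : List (List Int) × PySem.Dict Int Int) ir =>
            if gd.2.contains ir.2 then
              let gi := gd.2.getD ir.2 0
              (PySem.List.pySetD gd.1 gi (pvGetL gd.1 gi ++ [ir.1]), gd.2)
            else
              (gd.1 ++ [[ir.1]], gd.2.insert ir.2 (gd.1.length : Int)))
          ([], PySem.Dict.empty)).1.getD j []).length : Int)) := by
    funext j
    simp
  rw [this, map_range_getD]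


-- pass-1 coverage: the first DFS finishes every vertex exactly once, with in-range labels
structure Inv1 (adj : List (List Int)) (a : KosaA) : Prop where
  lenE : a.explored.length = adj.length
  lenR : a.remains.length = adj.length
  lenL : a.lead.length = adj.length
  remle : ∀ c < adj.length, a.remains.getD c 0 < ((adj.getD c []).length : Int)
  fresh : ∀ c < adj.length, a.explored.getD c false = false →
    a.remains.getD c 0 = ((adj.getD c []).length : Int) - 1
  fiff : ∀ c, a.explored.getD c false = true ↔ c ∈ a.finish.map (fun u => pidx adj.length u)
  fnod : (a.finish.map (fun u => pidx adj.length u)).Nodup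
  flab : ∀ u ∈ a.finish, 0 ≤ u ∧ u < (adj.length : Int)

lemma pass1_cover (adj : List (List Int)) (hadj : AdjOK adj)
    (hpos : ∀ lst ∈ adj, ∀ w ∈ lst, 0 ≤ w) :
    ∀ (roots : List Int), (∀ v ∈ roots, 0 ≤ v ∧ v < (adj.length : Int)) →
    ∀ (a : KosaA), Inv1 adj a →
    Inv1 adj
      (roots.foldl (fun (s : KosaA) leader =>
        loopA adj leader (dfsFuel adj)
          ⟨if pvGetB s.explored leader then [] else [leader],
           PySem.List.pySetD s.explored leader true, s.remains, s.finish, s.lead⟩) a)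
    ∧ (∀ c, a.explored.getD c false = true →
        (roots.foldl (fun (s : KosaA) leader =>
          loopA adj leader (dfsFuel adj)
            ⟨if pvGetB s.explored leader then [] else [leader],
             PySem.List.pySetD s.explored leader true, s.remains, s.finish, s.lead⟩) a).explored.getD c false = true)
    ∧ (∀ v ∈ roots,
        (roots.foldl (fun (s : KosaA) leader =>
          loopA adj leader (dfsFuel adj)
            ⟨if pvGetB s.explored leader then [] else [leader],
             PySem.List.pySetD s.explored leader true, s.remains, s.finish, s.lead⟩) a).explored.getD (pidx adj.length v) false = true) := by
  intro roots
  induction roots with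
  | nil =>
    intro _ a h
    exact ⟨h, fun c hc => hc, by simp⟩
  | cons v t ih =>
    intro hroots a hI
    have hv : 0 ≤ v ∧ v < (adj.length : Int) := hroots v (by simp)
    have hvR : InR adj.length v := ⟨by omega, hv.2⟩
    set L := pidx adj.length v with hL
    have hLn : L < adj.length := pidx_lt hvR
    have htr : ∀ u ∈ t, 0 ≤ u ∧ u < (adj.length : Int) := fun u hu => hroots u (by simp [hu])
    obtain ⟨lenE, lenR, lenL, remle, fresh, fiff, fnod, flab⟩ := hI
    have hgetA : pvGetB a.explored v = a.explored.getD L false := by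
      rw [pvGetB, pvGetD_pidx _ _ _ (by rw [lenE]; exact hvR), lenE]
    simp only [List.foldl_cons]
    by_cases hE : a.explored.getD L false = true
    · have hEA : pvGetB a.explored v = true := by rw [hgetA]; exact hE
      rw [if_pos hEA]
      have hnoop : PySem.List.pySetD a.explored v true = a.explored := by
        rw [pvSetD_pidx _ _ _ (by rw [lenE]; exact hvR), lenE]
        exact set_true_of_getD_true _ _ hE
      rw [hnoop, loopA_nil]
      obtain ⟨h1, h2, h3⟩ := ih htr ⟨[], a.explored, a.remains, a.finish, a.lead⟩
        ⟨lenE, lenR, lenL, remle, fresh, fiff, fnod, flab⟩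
      refine ⟨h1, h2, ?_⟩
      intro u hu
      rcases List.mem_cons.1 hu with rfl | hu'
      · exact h2 L hE
      · exact h3 u hu'
    · have hEf : a.explored.getD L false = false := by
        revert hE; cases a.explored.getD L false <;> simp
      have hEA : ¬ pvGetB a.explored v = true := by rw [hgetA, hEf]; simp
      rw [if_neg hEA]
      obtain ⟨alenE, alenR, alenL, haiff, _, _, ⟨seg, hfin, hsegN, hsegL, hsegIff⟩,
        hremle', hfresh'⟩ :=
        Ablock_run adj hadj a.explored a.remains a.finish a.lead v lenE lenR lenL hvR hEf
          remle fresh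
      set s1 := loopA adj v (dfsFuel adj)
        ⟨[v], PySem.List.pySetD a.explored v true, a.remains, a.finish, a.lead⟩ with hs1
      have hnext : Inv1 adj s1 := by
        refine ⟨alenE, alenR, alenL, hremle', hfresh', ?_, ?_, ?_⟩
        · intro c
          rw [haiff c, hfin, List.map_append, List.mem_append, fiff c, hsegIff c]
        · rw [hfin, List.map_append, List.nodup_append]
          refine ⟨fnod, hsegN, ?_⟩
          intro c hc c' hc' hcc
          subst hcc
          have hcRA := (hsegIff c).1 hc'
          have := RA_ne_e hEf hcRA
          rw [(fiff c).2 hc] at this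
          cases this
        · intro u hu
          rw [hfin] at hu
          rcases List.mem_append.1 hu with hu' | hu'
          · exact flab u hu'
          · obtain ⟨hIR, horigin⟩ := hsegL u hu'
            rcases horigin with rfl | ⟨lst, hlst, hul⟩
            · exact hv
            · have := hpos lst hlst u hul
              exact ⟨this, hIR.2⟩
      obtain ⟨h1, h2, h3⟩ := ih htr s1 hnext
      refine ⟨h1, ?_, ?_⟩
      · intro c hc
        exact h2 c ((haiff c).2 (Or.inl hc))
      · intro u hu
        rcases List.mem_cons.1 hu with rfl | hu'
        · exact h2 (pidx adj.length u) ((haiff _).2 (Or.inr RA.refl))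
        · exact h3 u hu'

-- counting: every list is the table of its own reads
lemma listAsMap (l : List Int) : l = (List.range l.length).map (fun c => l.getD c 0) := by
  apply List.ext_getElem (by simp)
  intro i h1 h2
  simp only [List.getElem_map, List.getElem_range]
  rw [List.getD_eq_getElem _ _ h1]

lemma countP_mem_range (n : Nat) (l : List Nat) (hnd : l.Nodup) (hlt : ∀ x ∈ l, x < n) :
    (List.range n).countP (fun c => decide (c ∈ l)) = l.length := by
  rw [List.countP_eq_length_filter]
  have hperm : ((List.range n).filter (fun c => decide (c ∈ l))).Perm l := by
    rw [List.perm_ext_iff_of_nodup (List.Nodup.filter _ List.nodup_range) hnd]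
    intro c
    rw [List.mem_filter, List.mem_range]
    constructor
    · rintro ⟨_, hc⟩; exact of_decide_eq_true hc
    · intro hc; exact ⟨hlt c hc, decide_eq_true hc⟩
  exact hperm.length_eq

-- selection: the repeated max-and-remove loop depends only on the multiset of sizes
lemma max_getD_perm (l1 l2 : List Int) (hp : l1.Perm l2) :
    (PySem.List.max? l1 (fun y => y)).getD 0 = (PySem.List.max? l2 (fun y => y)).getD 0 := by
  match h1 : PySem.List.max? l1 (fun y => y), h2 : PySem.List.max? l2 (fun y => y) with
  | none, none => rfl
  | none, some m2 =>
    rw [PySem.List.max?_eq_none_iff] at h1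
    subst h1
    have := PySem.List.max?_mem h2
    rw [← hp.mem_iff] at this
    cases this
  | some m1, none =>
    rw [PySem.List.max?_eq_none_iff] at h2
    subst h2
    have := PySem.List.max?_mem h1
    rw [hp.mem_iff] at this
    cases this
  | some m1, some m2 =>
    have hm1 := PySem.List.max?_mem h1
    have hm2 := PySem.List.max?_mem h2
    have hle1 := PySem.List.max?_isMax h1
    have hle2 := PySem.List.max?_isMax h2
    simp only [Option.getD_some]
    exact le_antisymm (hle2 m1 (hp.mem_iff.1 hm1)) (hle1 m2 (hp.symm.mem_iff.1 hm2))

lemma sel_perm : ∀ (r : List Int) (l1 l2 sol : List Int), l1.Perm l2 →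
    (r.foldl (fun (ss : List Int × List Int) _ =>
      let largest := (PySem.List.max? ss.1 (fun y => y)).getD 0
      ((PySem.List.remove? ss.1 largest).getD ss.1, ss.2 ++ [largest])) (l1, sol)).2
    = (r.foldl (fun (ss : List Int × List Int) _ =>
      let largest := (PySem.List.max? ss.1 (fun y => y)).getD 0
      ((PySem.List.remove? ss.1 largest).getD ss.1, ss.2 ++ [largest])) (l2, sol)).2 := by
  intro r
  induction r with
  | nil => intro l1 l2 sol hp; rfl
  | cons x t ih =>
    intro l1 l2 sol hp
    simp only [List.foldl_cons]
    have hmax := max_getD_perm l1 l2 hp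
    set m := (PySem.List.max? l1 (fun y => y)).getD 0 with hm
    rw [← hmax]
    have hrem : ((PySem.List.remove? l1 m).getD l1).Perm ((PySem.List.remove? l2 m).getD l2) := by
      by_cases hmem : m ∈ l1
      · rw [PySem.List.remove?_eq_some_erase l1 m hmem,
          PySem.List.remove?_eq_some_erase l2 m (hp.mem_iff.1 hmem)]
        simp only [Option.getD_some]
        exact hp.erase m
      · rw [(PySem.List.remove?_eq_none_iff l1 m).2 hmem,
          (PySem.List.remove?_eq_none_iff l2 m).2 (fun hx => hmem (hp.mem_iff.2 hx))]
        simpa using hp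
    exact ih _ _ _ hrem

-- ===== VERDICT (by name: the statement is the Claim_ definition above) =====
lemma replicate_getD_false (k c : Nat) : (List.replicate k false).getD c false = false := by
  by_cases hc : c < k
  · rw [List.getD_eq_getElem _ _ (by simpa using hc)]
    simp
  · rw [List.getD_eq_default _ _ (by simpa using Nat.le_of_not_lt hc)]

lemma pyRange_getD (k : Nat) (c : Nat) (hc : c < k) :
    (PySem.List.pyRange 0 (k : Int) 1).getD c 0 = (c : Int) := by
  rw [List.getD_eq_getElem _ _ (by
    rw [PySem.List.length_pyRange_one]; omega)]
  rw [PySem.List.getElem_pyRange_one]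
  simp

theorem output_size_spec : Claim_equal_output_size := by
  intro adjlist x hDom hPre
  obtain ⟨hadjP, _⟩ := hPre
  have hadj : AdjOK adjlist := hadjP
  show output_size adjlist x = output_size_alt adjlist x
  obtain ⟨hrevlen, hrevent⟩ := rev_len_ok adjlist
  have hrevadj : AdjOK (graphReverse adjlist) := by
    intro lst hl w hw
    have hb := hrevent lst hl w hw
    unfold InR
    rw [hrevlen]
    omega
  have hrevpos : ∀ lst ∈ graphReverse adjlist, ∀ w ∈ lst, 0 ≤ w := by
    intro lst hl w hw
    exact (hrevent lst hl w hw).1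
  set rev := graphReverse adjlist with hrevdef
  set nr := rev.length with hnr
  -- ===== pass 1: order equality and coverage =====
  have hord_eq := pass1_eq rev hrevadj
  set F1 := (PySem.List.pyRange 0 (nr : Int) 1).foldl
    (fun (s : KosaA) leader =>
      loopA rev leader (dfsFuel rev)
        ⟨if pvGetB s.explored leader then [] else [leader],
         PySem.List.pySetD s.explored leader true, s.remains, s.finish, s.lead⟩)
    ⟨[], List.replicate nr false, rev.map (fun lst => (lst.length : Int) - 1), [],
     PySem.List.pyRange 0 nr 1⟩ with hF1
  have hdfs1 : (dfsA rev (PySem.List.pyRange 0 (nr : Int) 1)).1 = F1.finish := rfl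
  have hroots1 : ∀ v ∈ PySem.List.pyRange 0 (nr : Int) 1, 0 ≤ v ∧ v < (nr : Int) := by
    intro v hv
    have := PySem.List.mem_pyRange_one.1 hv
    omega
  have hInv1_0 : Inv1 rev ⟨[], List.replicate nr false,
      rev.map (fun lst => (lst.length : Int) - 1), [], PySem.List.pyRange 0 nr 1⟩ := by
    refine ⟨by simp [hnr], by simp, ?_, ?_, ?_, ?_, by simp, by simp⟩
    · simp only []
      rw [PySem.List.length_pyRange_one]
      omega
    · intro c hc
      simp only []
      rw [List.getD_eq_getElem _ _ (by simpa using hc), List.getElem_map,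
        List.getD_eq_getElem _ _ hc]
      omega
    · intro c hc _
      simp only []
      rw [List.getD_eq_getElem _ _ (by simpa using hc), List.getElem_map,
        List.getD_eq_getElem _ _ hc]
    · intro c
      simp only [replicate_getD_false]
      simp
  obtain ⟨hI1, _, hmk1⟩ := pass1_cover rev hrevadj hrevpos _ hroots1 _ hInv1_0
  set ord := F1.finish with hord
  have hordlab : ∀ v ∈ ord, 0 ≤ v ∧ v < (nr : Int) := hI1.flab
  have hordnod : (ord.map (fun u => pidx nr u)).Nodup := hI1.fnod
  have hcover : ∀ c < nr, c ∈ ord.map (fun u => pidx nr u) := by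
    intro c hc
    have hvmem : ((c : Int)) ∈ PySem.List.pyRange 0 (nr : Int) 1 := by
      rw [PySem.List.mem_pyRange_one]
      omega
    have := hmk1 (c : Int) hvmem
    have hpc : pidx nr (c : Int) = c := by
      unfold pidx
      rw [if_pos (by omega)]
      simp
    rw [hpc] at this
    exact (hI1.fiff c).1 this
  -- ===== pass 2: synchronized block decomposition =====
  have hnrn : nr = adjlist.length := hrevlen
  have hroots2 : ∀ v ∈ ord.reverse, 0 ≤ v ∧ v < (adjlist.length : Int) := by
    intro v hv
    have := hordlab v (List.mem_reverse.1 hv)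
    omega
  set F2 := ord.reverse.foldl
    (fun (s : KosaA) leader =>
      loopA adjlist leader (dfsFuel adjlist)
        ⟨if pvGetB s.explored leader then [] else [leader],
         PySem.List.pySetD s.explored leader true, s.remains, s.finish, s.lead⟩)
    ⟨[], List.replicate adjlist.length false,
      adjlist.map (fun lst => (lst.length : Int) - 1), [],
      PySem.List.pyRange 0 adjlist.length 1⟩ with hF2
  have hdfs2 : (dfsA adjlist ord.reverse).2 = F2.lead := rfl
  set bF := ord.reverse.foldl
    (fun (ss : List Bool × List Int) v =>
      if pvGetB ss.1 v then ss
      else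
        ((bfsLoop adjlist (adjlist.length + 1) [v] 0 (PySem.List.pySetD ss.1 v true)).2,
          ss.2 ++ [PySem.List.len (bfsLoop adjlist (adjlist.length + 1) [v] 0
            (PySem.List.pySetD ss.1 v true)).1]))
    (List.replicate adjlist.length false, []) with hbF
  have hInv2_0 : Inv2 adjlist
      ⟨[], List.replicate adjlist.length false,
        adjlist.map (fun lst => (lst.length : Int) - 1), [],
        PySem.List.pyRange 0 adjlist.length 1⟩
      (List.replicate adjlist.length false, []) := by
    refine ⟨by simp, by simp, by simp, ?_, ?_, ?_, ?_, [], rfl, by simp, by simp, ?_, by simp, ?_⟩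
    · simp only []
      rw [PySem.List.length_pyRange_one]
      omega
    · intro c
      simp
    · intro c hc
      simp only []
      rw [List.getD_eq_getElem _ _ (by simpa using hc), List.getElem_map,
        List.getD_eq_getElem _ _ hc]
      omega
    · intro c hc _
      simp only []
      rw [List.getD_eq_getElem _ _ (by simpa using hc), List.getElem_map,
        List.getD_eq_getElem _ _ hc]
    · intro c
      simp only [replicate_getD_false]
      simp
    · intro c hc _
      simp only []
      exact pyRange_getD adjlist.length c hc
  obtain ⟨hI2, _, hmk2⟩ := pass2_sim adjlist hadj ord.reverse hroots2 _ _ hInv2_0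
  obtain ⟨lenE2, lenR2, lenS2, lenL2, same2, remle2, fresh2, bl, hsz, hndl, hper, hexp,
    hlead, huntouched⟩ := hI2
  -- every cell is explored at the end of pass 2
  have hallexp : ∀ c < adjlist.length, F2.explored.getD c false = true := by
    intro c hc
    have := hcover c (by omega)
    rcases List.mem_map.1 this with ⟨v, hv, hve⟩
    have := hmk2 v (List.mem_reverse.2 hv)
    have hpe : pidx adjlist.length v = c := by
      rw [← hnrn]
      exact hve
    rw [hpe] at this
    exact this
  set father := F2.lead with hfather
  -- each block leader occurs in father exactly block-size often
  have hcount : ∀ p ∈ bl, father.count p.1 = p.2.length := by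
    intro p hp
    have hiff : ∀ c < adjlist.length, (father.getD c 0 = p.1 ↔ c ∈ p.2) := by
      intro c hc
      constructor
      · intro hfc
        obtain ⟨q, hq, hcq⟩ := (hexp c).1 (hallexp c hc)
        have : father.getD c 0 = q.1 := hlead q hq c hcq
        have hq1 : q.1 = p.1 := by rw [← this, hfc]
        have : q = p := nodup_map_mem_inj hndl q hq p hp hq1
        rw [← this]
        exact hcq
      · intro hcp
        exact hlead p hp c hcp
    conv_lhs => rw [listAsMap father, lenL2]
    rw [List.count_eq_countP, List.countP_map]
    rw [List.countP_congr (q := fun c => decide (c ∈ p.2)) ?_]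
    · exact countP_mem_range adjlist.length p.2 ((hper p hp).2.1) ((hper p hp).2.2.2)
    · intro c hcmem
      have hc := List.mem_range.1 hcmem
      simp only [Function.comp_apply, beq_iff_eq, decide_eq_true_eq]
      exact hiff c hc
  -- the values of father are exactly the block leaders
  have hmemf : ∀ (v : Int), v ∈ father ↔ v ∈ bl.map Prod.fst := by
    intro v
    constructor
    · intro hvf
      obtain ⟨i, hi, hiv⟩ := List.mem_iff_getElem.1 hvf
      have hci : i < adjlist.length := by rw [← lenL2]; exact hi
      obtain ⟨q, hq, hcq⟩ := (hexp i).1 (hallexp i hci)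
      have hfi : father.getD i 0 = q.1 := hlead q hq i hcq
      rw [List.getD_eq_getElem _ _ hi, hiv] at hfi
      rw [hfi]
      exact List.mem_map_of_mem hq
    · intro hvl
      rcases List.mem_map.1 hvl with ⟨p, hp, hpe⟩
      have hcell : p.1.toNat ∈ p.2 := (hper p hp).2.2.1
      have hlt : p.1.toNat < adjlist.length := (hper p hp).2.2.2 _ hcell
      have hfi : father.getD p.1.toNat 0 = p.1 := hlead p hp _ hcell
      rw [← hpe, ← hfi]
      rw [List.getD_eq_getElem _ _ (by rw [lenL2]; exact hlt)]
      exact List.getElem_mem _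
  have hofperm : (PySem.Set.ofList father).Perm (bl.map Prod.fst) := by
    rw [List.perm_ext_iff_of_nodup (PySem.Set.nodup_ofList (xs := father)) hndl]
    intro v
    rw [PySem.Set.mem_ofList]
    exact hmemf v
  have hsizesperm : ((PySem.Set.ofList father).map (fun k => (father.count k : Int))).Perm
      (bl.map (fun p => ((p.2.length : Nat) : Int))) := by
    refine (hofperm.map (fun k => (father.count k : Int))).trans ?_
    rw [List.map_map]
    apply List.Perm.of_eq
    apply List.map_congr_left
    intro p hp
    simp only [Function.comp_apply]
    rw [hcount p hp]
  have hcountervals : (father.foldl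
      (fun (d : PySem.Dict Int Int) root => d.insert root (d.getD root 0 + 1))
      PySem.Dict.empty).values
      = (PySem.Set.ofList father).map (fun k => (father.count k : Int)) := by
    rw [PySem.Dict.foldl_insert_getD_add_one_eq_counter, PySem.Dict.values,
      PySem.Dict.items_counter, List.map_map]
    rfl
  -- ===== assemble =====
  have hfo : finOrder rev = ord := hord_eq.symm.trans hdfs1
  simp only [output_size, output_size_alt, sccA]
  rw [← rev_eq, ← hrevdef, hord_eq, hfo, hdfs2, group_sizes_eq, hcountervals, ← hbF, hsz]
  exact sel_perm (PySem.List.pyRange 0 x 1) _ _ [] hsizesperm
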